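-- pv_equiv track=rewrite | github.com/Ag3497120/verantyx-v6 | arc/world_commands.py | duplicate_objs_v
-- ===== SOURCE A (Python) =====
-- from collections import Counter, defaultdict
--
-- def _bg(g):
--     c = Counter()
--     for row in g: c.update(row)
--     return c.most_common(1)[0][0]
--
-- def _copy(g):
--     return [row[:] for row in g]
--
-- def _objects(g, bg, conn=4):
--     h, w = len(g), len(g[0])
--     vis = [[False]*w for _ in range(h)]
--     objs = []
--     ds = [(-1,0),(1,0),(0,-1),(0,1)]
--     if conn == 8: ds += [(-1,-1),(-1,1),(1,-1),(1,1)]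
--     for r in range(h):
--         for c in range(w):
--             if not vis[r][c] and g[r][c] != bg:
--                 obj = []; stk = [(r,c)]; vis[r][c] = True
--                 while stk:
--                     cr, cc = stk.pop()
--                     obj.append((cr,cc,g[cr][cc]))
--                     for dr,dc in ds:
--                         nr,nc = cr+dr, cc+dc
--                         if 0<=nr<h and 0<=nc<w and not vis[nr][nc] and g[nr][nc] != bg:
--                             vis[nr][nc] = True; stk.append((nr,nc))
--                 objs.append(obj)
--     return objs
--
-- def _bbox(cells):
--     rs = [r for r,c,_ in cells]; cs = [c for r,c,_ in cells]
--     return min(rs), min(cs), max(rs), max(cs)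
--
-- def duplicate_objs_v(g):
--     bg=_bg(g); objs=_objects(g,bg); h,w=len(g),len(g[0]); res=_copy(g)
--     for obj in objs:
--         r0,c0,r1,c1=_bbox(obj)
--         oh=r1-r0+1
--         for r,c,v in obj:
--             nr=r+oh+1
--             if 0<=nr<h: res[nr][c]=v
--     return res
-- ===== SOURCE B (Python) =====
-- from collections import Counter
--
-- def duplicate_objs_v(g):
--     # Union-find over raster indices instead of flood fill: union each non-background
--     # cell with its up/left non-background neighbours, group cells by root (the root is
--     # the component's minimum raster index), then paste each group shifted down by its
--     # bbox height + 1, processing groups in ascending root order (A's discovery order).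
--     h, w = len(g), len(g[0])
--     bg = Counter(v for row in g for v in row).most_common(1)[0][0]
--     parent = {}
--
--     def find(i):
--         while parent.get(i, i) != i:
--             i = parent[i]
--         return i
--
--     for r in range(h):
--         for c in range(w):
--             if g[r][c] == bg:
--                 continue
--             i = r * w + c
--             for nr, nc in ((r - 1, c), (r, c - 1)):
--                 if nr >= 0 and nc >= 0 and g[nr][nc] != bg:
--                     ri, rj = find(i), find(nr * w + nc)
--                     if ri != rj:
--                         if ri < rj:
--                             parent[rj] = ri
--                         else:
--                             parent[ri] = rj
--     groups = {}
--     for r in range(h):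
--         for c in range(w):
--             if g[r][c] != bg:
--                 groups.setdefault(find(r * w + c), []).append((r, c))
--     res = [row[:] for row in g]
--     for root in sorted(groups):
--         cells = groups[root]
--         rows = [r for r, _ in cells]
--         shift = max(rows) - min(rows) + 2
--         for r, c in cells:
--             if r + shift < h:
--                 res[r + shift][c] = g[r][c]
--     return res
-- ===== Notes on version B (the rewrite author's own statement) =====
-- stated objective: alternative
-- what changed: Replaces A's per-object stack flood fill with a visited matrix by a union-find over raster indices (each non-background cell is unioned with its up/left non-background neighbours, the smaller root winning), then groups cells by their root in one raster pass and pastes each group shifted down by its bbox height+1, processing groups in ascending root order, which coincides with A's discovery order.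
import Mathlib
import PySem

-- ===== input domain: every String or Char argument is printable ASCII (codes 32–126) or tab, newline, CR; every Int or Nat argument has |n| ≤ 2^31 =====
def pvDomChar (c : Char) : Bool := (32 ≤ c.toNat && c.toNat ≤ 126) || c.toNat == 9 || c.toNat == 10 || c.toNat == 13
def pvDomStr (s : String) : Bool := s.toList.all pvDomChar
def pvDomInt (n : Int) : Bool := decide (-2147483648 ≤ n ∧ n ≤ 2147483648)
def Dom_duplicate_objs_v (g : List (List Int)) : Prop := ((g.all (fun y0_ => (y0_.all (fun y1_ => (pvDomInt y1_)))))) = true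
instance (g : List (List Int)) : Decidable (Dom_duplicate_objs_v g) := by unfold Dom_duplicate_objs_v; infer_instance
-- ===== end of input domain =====

-- B replaces A's per-object stack flood fill over a visited matrix by a union-find over
-- raster indices (each non-background cell unioned with its up/left neighbours, smaller
-- root winning), grouping cells by root and pasting groups in ascending root order
-- (alternative algorithm; return value only, neither program mutates its argument).

-- ===== PORT A =====

-- g[r][c]; only evaluated at in-range nonnegative indices under Pre_
def pvCell (g : List (List Int)) (r c : Int) : Int := (g.getD r.toNat []).getD c.toNat 0

-- the four 4-connectivity neighbours, in the order A's `ds` lists them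
def pvNbrs (p : Int × Int) : List (Int × Int) :=
  [(p.1 - 1, p.2), (p.1 + 1, p.2), (p.1, p.2 - 1), (p.1, p.2 + 1)]

-- Counter.most_common(1)[0][0]: first key (insertion order) with maximal count;
-- shared library helper (both Pythons call collections.Counter.most_common)
def pvMostCommon1 (items : List (Int × Int)) : Int :=
  match items with
  | [] => 0          -- Python raises IndexError here; excluded by Pre_
  | kv :: rest => (rest.foldl (fun b x => if b.2 < x.2 then x else b) kv).1

def pvBgA (g : List (List Int)) : Int :=
  let c := g.foldl (fun d row => row.foldl (fun d v => PySem.Dict.modify d v 0 (· + 1)) d)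
    (PySem.Dict.empty : PySem.Dict Int Int)
  pvMostCommon1 c.items

def pvVisRead (vis : List (List Bool)) (p : Int × Int) : Bool :=
  (vis.getD p.1.toNat []).getD p.2.toNat false

def pvVisMark (vis : List (List Bool)) (p : Int × Int) : List (List Bool) :=
  vis.set p.1.toNat ((vis.getD p.1.toNat []).set p.2.toNat true)

-- the `while stk:` loop; the stack is kept top-first (Python appends/pops at the hot end),
-- fuel 2*h*w+1 is enough (proved below)
def pvFloodA (g : List (List Int)) (bg : Int) (h w : Nat) :
    Nat → List (List Bool) → List (Int × Int) → List (Int × Int × Int) →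
    List (Int × Int × Int) × List (List Bool)
  | 0, vis, _, obj => (obj, vis)
  | fuel + 1, vis, stk, obj =>
    match stk with
    | [] => (obj, vis)
    | x :: rest =>
      let obj' := obj ++ [(x.1, x.2, pvCell g x.1 x.2)]
      let st := (pvNbrs x).foldl (fun st q =>
        if 0 ≤ q.1 ∧ q.1 < (h : Int) ∧ 0 ≤ q.2 ∧ q.2 < (w : Int) ∧
           pvVisRead st.1 q = false ∧ pvCell g q.1 q.2 ≠ bg
        then (pvVisMark st.1 q, q :: st.2) else st) (vis, rest)
      pvFloodA g bg h w fuel st.1 st.2 obj'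

def pvObjectsA (g : List (List Int)) (bg : Int) : List (List (Int × Int × Int)) :=
  let h := g.length
  let w := (g.headD []).length
  let init : List (List Bool) × List (List (Int × Int × Int)) :=
    (List.replicate h (List.replicate w false), [])
  let st := (List.range h).foldl (fun st (r : Nat) => (List.range w).foldl (fun st (c : Nat) =>
      let p : Int × Int := ((r : Int), (c : Int))
      if pvVisRead st.1 p = false ∧ pvCell g p.1 p.2 ≠ bg then
        let fl := pvFloodA g bg h w (2 * h * w + 1) (pvVisMark st.1 p) [p] []
        (fl.2, st.2 ++ [fl.1])
      else st) st) init
  st.2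

-- Python min/max over a nonempty int list ([] unreachable: objects/groups are nonempty)
def pvMinL : List Int → Int
  | [] => 0
  | a :: t => t.foldl min a

def pvMaxL : List Int → Int
  | [] => 0
  | a :: t => t.foldl max a

def duplicate_objs_v (g : List (List Int)) : List (List Int) :=
  let bg := pvBgA g
  let objs := pvObjectsA g bg
  let h := g.length
  let res := g.map (fun row => row)          -- row[:] copies
  objs.foldl (fun res obj =>
    let r0 := pvMinL (obj.map (fun t => t.1))
    let _c0 := pvMinL (obj.map (fun t => t.2.1))
    let r1 := pvMaxL (obj.map (fun t => t.1))
    let _c1 := pvMaxL (obj.map (fun t => t.2.1))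
    let oh := r1 - r0 + 1
    obj.foldl (fun res t =>
      let nr := t.1 + oh + 1
      if 0 ≤ nr ∧ nr < (h : Int) then
        res.set nr.toNat ((res.getD nr.toNat []).set t.2.1.toNat t.2.2)
      else res) res) res

-- ===== PORT B =====

-- Source B's `find`: follow parent pointers to the root.  The while loop is ported with
-- fuel h*w+1, which suffices because parent pointers strictly decrease (proved below).
def ufFind (P : PySem.Dict Int Int) : Nat → Int → Int
  | 0, i => i
  | fuel + 1, i =>
    match P.get? i with
    | none => i
    | some j => if j ≠ i then ufFind P fuel j else i

def duplicate_objs_v_alt (g : List (List Int)) : List (List Int) :=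
  let h := g.length
  let w := (g.headD []).length
  let counts := (g.flatMap (fun row => row)).foldl
    (fun d v => PySem.Dict.modify d v 0 (· + 1)) (PySem.Dict.empty : PySem.Dict Int Int)
  let bg := pvMostCommon1 counts.items
  let parent := (List.range h).foldl (fun P (r : Nat) => (List.range w).foldl (fun P (c : Nat) =>
      if pvCell g (r : Int) (c : Int) = bg then P
      else
        [((r : Int) - 1, (c : Int)), ((r : Int), (c : Int) - 1)].foldl (fun P n =>
          if 0 ≤ n.1 ∧ 0 ≤ n.2 ∧ pvCell g n.1 n.2 ≠ bg then
            let ri := ufFind P (h * w + 1) ((r : Int) * (w : Int) + (c : Int))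
            let rj := ufFind P (h * w + 1) (n.1 * (w : Int) + n.2)
            if ri ≠ rj then (if ri < rj then P.insert rj ri else P.insert ri rj) else P
          else P) P) P) (PySem.Dict.empty : PySem.Dict Int Int)
  let groups := (List.range h).foldl (fun G (r : Nat) => (List.range w).foldl (fun G (c : Nat) =>
      if pvCell g (r : Int) (c : Int) ≠ bg then
        PySem.Dict.modify G (ufFind parent (h * w + 1) ((r : Int) * (w : Int) + (c : Int))) []
          (fun l => l ++ [((r : Int), (c : Int))])
      else G) G) (PySem.Dict.empty : PySem.Dict Int (List (Int × Int)))
  let res0 := g.map (fun row => row)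
  (PySem.List.sorted groups.keys (fun x => x) false).foldl (fun res root =>
    let cells := groups.getD root []
    let rows := cells.map Prod.fst
    let shift := pvMaxL rows - pvMinL rows + 2
    cells.foldl (fun res p =>
      if p.1 + shift < (g.length : Int) then
        res.set (p.1 + shift).toNat
          ((res.getD (p.1 + shift).toNat []).set p.2.toNat (pvCell g p.1 p.2))
      else res) res) res0

-- ===== PRECONDITION & SPEC =====
-- Pre_ excludes exactly the inputs on which Python A raises: the empty grid, grids whose
-- rows are all empty (IndexError in _bg's most_common), and grids with a row shorter than
-- row 0 (IndexError indexing g[r][c] for c < len(g[0])).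
def Pre_duplicate_objs_v (g : List (List Int)) : Prop :=
  g ≠ [] ∧ (∃ row ∈ g, row ≠ []) ∧ ∀ row ∈ g, (g.headD []).length ≤ row.length
instance (g : List (List Int)) : Decidable (Pre_duplicate_objs_v g) := by
  unfold Pre_duplicate_objs_v; infer_instance

def pvWitness_duplicate_objs_v : List (List Int) := [[0, 0, 0], [0, 1, 0], [0, 0, 0]]

def Spec_duplicate_objs_v (g : List (List Int)) (out : List (List Int)) : Prop := out = duplicate_objs_v_alt g
instance (g : List (List Int)) (out : List (List Int)) : Decidable (Spec_duplicate_objs_v g out) := by unfold Spec_duplicate_objs_v; infer_instance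

-- ===== CLAIM (what is proved, stated in full; the proofs are below) =====
def Claim_equal_duplicate_objs_v : Prop := ∀ (g : List (List Int)), Dom_duplicate_objs_v g → Pre_duplicate_objs_v g → Spec_duplicate_objs_v g (duplicate_objs_v g)

-- ===== LEMMAS AND PROOFS =====

-- ---------- geometry ----------

abbrev pvInB (h w : Nat) (p : Int × Int) : Prop :=
  0 ≤ p.1 ∧ p.1 < (h : Int) ∧ 0 ≤ p.2 ∧ p.2 < (w : Int)

abbrev pvGood (g : List (List Int)) (bg : Int) (h w : Nat) (p : Int × Int) : Prop :=
  pvInB h w p ∧ pvCell g p.1 p.2 ≠ bg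

def pvReach (g : List (List Int)) (bg : Int) (h w : Nat) (s p : Int × Int) : Prop :=
  Relation.ReflTransGen (fun a b => b ∈ pvNbrs a ∧ pvGood g bg h w b) s p

def pvIdx (w : Nat) (p : Int × Int) : Int := p.1 * (w : Int) + p.2

lemma pvNbrs_symm (p q : Int × Int) : p ∈ pvNbrs q ↔ q ∈ pvNbrs p := by
  simp only [pvNbrs, List.mem_cons, List.mem_singleton, List.not_mem_nil, or_false,
    Prod.ext_iff]
  obtain ⟨a, b⟩ := p; obtain ⟨c, d⟩ := q; simp only []; omega

lemma pvNbrs_nodup (p : Int × Int) : (pvNbrs p).Nodup := by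
  obtain ⟨a, b⟩ := p
  simp [pvNbrs, Prod.ext_iff]; omega

lemma pvReach_good {g : List (List Int)} {bg : Int} {h w : Nat} {s p : Int × Int}
    (h1 : pvReach g bg h w s p) : p = s ∨ pvGood g bg h w p := by
  induction h1 with
  | refl => exact Or.inl rfl
  | tail _ hstep _ => exact Or.inr hstep.2

lemma pvReach_symm {g : List (List Int)} {bg : Int} {h w : Nat} {s p : Int × Int}
    (hs : pvGood g bg h w s) (h1 : pvReach g bg h w s p) : pvReach g bg h w p s := by
  induction h1 with
  | refl => exact Relation.ReflTransGen.refl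
  | tail hr hstep ih =>
    rename_i b c
    have hb : pvGood g bg h w b := by
      rcases pvReach_good hr with rfl | hg
      · exact hs
      · exact hg
    exact Relation.ReflTransGen.head ⟨(pvNbrs_symm b c).mpr hstep.1, hb⟩ ih

lemma pvIdx_nonneg {h w : Nat} {p : Int × Int} (hp : pvInB h w p) : 0 ≤ pvIdx w p := by
  have h1 : (0 : Int) ≤ p.1 * (w : Int) := mul_nonneg hp.1 (by positivity)
  have h2 := hp.2.2.1
  unfold pvIdx; omega

lemma pvIdx_lt {h w : Nat} {p : Int × Int} (hp : pvInB h w p) :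
    pvIdx w p < (h : Int) * (w : Int) := by
  obtain ⟨h1, h2, h3, h4⟩ := hp
  have e1 : p.1 * (w : Int) + p.2 < (p.1 + 1) * (w : Int) := by
    have e : (p.1 + 1) * (w : Int) = p.1 * w + w := by ring
    omega
  have e2 : (p.1 + 1) * (w : Int) ≤ (h : Int) * w :=
    mul_le_mul_of_nonneg_right (by omega) (by positivity)
  unfold pvIdx; omega

lemma pvIdx_toNat_lt {h w : Nat} {p : Int × Int} (hp : pvInB h w p) :
    (pvIdx w p).toNat < h * w := by
  have h1 := pvIdx_lt hp
  have h2 := pvIdx_nonneg hp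
  have h3 : ((h * w : Nat) : Int) = (h : Int) * (w : Int) := by push_cast; ring
  omega

lemma pvIdx_row_lt {h w : Nat} {p q : Int × Int} (hp : pvInB h w p) (hq : pvInB h w q)
    (hlt : p.1 < q.1) : pvIdx w p < pvIdx w q := by
  obtain ⟨a1, a2, a3, a4⟩ := hp
  obtain ⟨b1, b2, b3, b4⟩ := hq
  have e1 : p.1 * (w : Int) + p.2 < (p.1 + 1) * (w : Int) := by
    have e : (p.1 + 1) * (w : Int) = p.1 * w + w := by ring
    omega
  have e2 : (p.1 + 1) * (w : Int) ≤ q.1 * w :=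
    mul_le_mul_of_nonneg_right (by omega) (by positivity)
  have e3 : (0 : Int) ≤ q.2 := b3
  unfold pvIdx; omega

lemma pvIdx_inj {h w : Nat} {p q : Int × Int} (hp : pvInB h w p) (hq : pvInB h w q)
    (he : pvIdx w p = pvIdx w q) : p = q := by
  rcases lt_trichotomy p.1 q.1 with hlt | heq | hlt
  · exact absurd he (by have := pvIdx_row_lt hp hq hlt; omega)
  · have h2 : p.2 = q.2 := by
      unfold pvIdx at he
      rw [heq] at he
      omega
    exact Prod.ext heq h2
  · exact absurd he (by have := pvIdx_row_lt hq hp hlt; omega)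

-- ---------- flood-fill worklist invariant (A side) ----------

structure PvFInv (g : List (List Int)) (bg : Int) (h w : Nat) (V0 : Int × Int → Prop)
    (s : Int × Int) (V : Int × Int → Prop) (W O : List (Int × Int)) : Prop where
  vch : ∀ p, V p ↔ V0 p ∨ p ∈ W ∨ p ∈ O
  nd : (W ++ O).Nodup
  gd : ∀ p, p ∈ W ++ O → pvGood g bg h w p ∧ pvReach g bg h w s p ∧ ¬ V0 p
  cl : ∀ p ∈ O, ∀ q ∈ pvNbrs p, pvGood g bg h w q → V q
  sm : s ∈ W ++ O

lemma PvFInv.stepx {g : List (List Int)} {bg : Int} {h w : Nat} {V0 : Int × Int → Prop}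
    {s x : Int × Int} {V : Int × Int → Prop} {rest O : List (Int × Int)}
    (inv : PvFInv g bg h w V0 s V (x :: rest) O)
    {N : List (Int × Int)} (hNnd : N.Nodup)
    (hN : ∀ q, q ∈ N ↔ q ∈ pvNbrs x ∧ pvGood g bg h w q ∧ ¬ V q)
    {V' : Int × Int → Prop} (hV' : ∀ p, V' p ↔ V p ∨ p ∈ N)
    {W' : List (Int × Int)} (hW'nd : W'.Nodup) (hW' : ∀ p, p ∈ W' ↔ p ∈ rest ∨ p ∈ N) :
    PvFInv g bg h w V0 s V' W' (O ++ [x]) := by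
  obtain ⟨hvch, hnd, hgd, hcl, hsm⟩ := inv
  obtain ⟨hxrnd, hOnd, hdisj⟩ := List.nodup_append.mp hnd
  have hxrest : x ∉ rest := (List.nodup_cons.mp hxrnd).1
  have hrestnd : rest.Nodup := (List.nodup_cons.mp hxrnd).2
  have hVx : V x := (hvch x).mpr (Or.inr (Or.inl (by simp)))
  have hVO : ∀ p ∈ O, V p := fun p hp => (hvch p).mpr (Or.inr (Or.inr hp))
  have hVrest : ∀ p ∈ rest, V p := fun p hp =>
    (hvch p).mpr (Or.inr (Or.inl (by simp [hp])))
  have hNnotV : ∀ p ∈ N, ¬ V p := fun p hp => ((hN p).mp hp).2.2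
  have hgx : pvGood g bg h w x ∧ pvReach g bg h w s x ∧ ¬ V0 x :=
    hgd x (by simp)
  refine ⟨?_, ?_, ?_, ?_, ?_⟩
  · intro p
    rw [hV' p, hvch p, hW' p]
    simp only [List.mem_append, List.mem_cons, List.mem_singleton]
    tauto
  · rw [List.nodup_append]
    refine ⟨hW'nd, ?_, ?_⟩
    · rw [List.nodup_append]
      refine ⟨hOnd, List.nodup_singleton x, ?_⟩
      intro a ha b hb
      rcases List.mem_cons.mp hb with rfl | h0
      · intro he
        exact (hdisj b (by simp) b (he ▸ ha)) rfl
      · cases h0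
    · intro a ha b hb he
      subst he
      rcases (hW' a).mp ha with h1 | h1 <;>
        rcases List.mem_append.mp hb with h2 | h2
      · exact hdisj a (by simp [h1]) a h2 rfl
      · rcases List.mem_cons.mp h2 with he' | h0
        · rw [← he'] at hxrest; exact hxrest h1
        · cases h0
      · exact hNnotV a h1 (hVO a h2)
      · rcases List.mem_cons.mp h2 with he' | h0
        · exact hNnotV a h1 (by rw [he']; exact hVx)
        · cases h0
  · intro p hp
    rcases List.mem_append.mp hp with h1 | h1
    · rcases (hW' p).mp h1 with h2 | h2
      · exact hgd p (by simp [h2])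
      · obtain ⟨hnb, hgq, hnV⟩ := (hN p).mp h2
        refine ⟨hgq, hgx.2.1.tail ⟨hnb, hgq⟩, fun h0 => hnV ((hvch p).mpr (Or.inl h0))⟩
    · rcases List.mem_append.mp h1 with h2 | h2
      · exact hgd p (by simp [h2])
      · simp only [List.mem_cons, List.not_mem_nil, or_false] at h2
        subst h2
        exact hgx
  · intro p hp q hq hgq
    rcases List.mem_append.mp hp with h1 | h1
    · exact (hV' q).mpr (Or.inl (hcl p h1 q hq hgq))
    · simp only [List.mem_cons, List.not_mem_nil, or_false] at h1
      subst h1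
      by_cases hVq : V q
      · exact (hV' q).mpr (Or.inl hVq)
      · exact (hV' q).mpr (Or.inr ((hN q).mpr ⟨hq, hgq, hVq⟩))
  · rcases List.mem_append.mp hsm with h1 | h1
    · rcases List.mem_cons.mp h1 with rfl | h2
      · simp
      · exact List.mem_append.mpr (Or.inl ((hW' s).mpr (Or.inl h2)))
    · exact List.mem_append.mpr (Or.inr (by simp [h1]))

lemma pvReach_notV0 {g : List (List Int)} {bg : Int} {h w : Nat} {V0 : Int × Int → Prop}
    {s p : Int × Int}
    (hV0 : ∀ a, V0 a → ∀ q ∈ pvNbrs a, pvGood g bg h w q → V0 q)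
    (hgs : pvGood g bg h w s) (hs0 : ¬ V0 s) (hr : pvReach g bg h w s p) : ¬ V0 p := by
  induction hr with
  | refl => exact hs0
  | tail hr' hstep ih =>
    rename_i b c
    intro hc
    apply ih
    have hb : pvGood g bg h w b := by
      rcases pvReach_good hr' with h | h
      · exact h ▸ hgs
      · exact h
    exact hV0 c hc b ((pvNbrs_symm b c).mpr hstep.1) hb

lemma PvFInv.terminal {g : List (List Int)} {bg : Int} {h w : Nat} {V0 : Int × Int → Prop}
    {s : Int × Int} {V : Int × Int → Prop} {O : List (Int × Int)}
    (hV0 : ∀ a, V0 a → ∀ q ∈ pvNbrs a, pvGood g bg h w q → V0 q)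
    (hgs : pvGood g bg h w s) (hs0 : ¬ V0 s)
    (inv : PvFInv g bg h w V0 s V [] O) :
    (∀ p, p ∈ O ↔ pvReach g bg h w s p) ∧ O.Nodup ∧
    (∀ p, V p ↔ V0 p ∨ pvReach g bg h w s p) := by
  obtain ⟨hvch, hnd, hgd, hcl, hsm⟩ := inv
  simp only [List.nil_append] at hnd hgd hsm
  have hmem : ∀ p, p ∈ O ↔ pvReach g bg h w s p := by
    intro p
    constructor
    · intro hp
      exact (hgd p hp).2.1
    · intro hr
      induction hr with
      | refl => exact hsm
      | tail hr' hstep ih =>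
        rename_i b c
        have hb : b ∈ O := ih
        have hVc : V c := hcl b hb c hstep.1 hstep.2
        rcases (hvch c).mp hVc with h0 | h0 | h0
        · exact absurd h0 (pvReach_notV0 hV0 hgs hs0 (hr'.tail hstep))
        · cases h0
        · exact h0
  refine ⟨hmem, hnd, fun p => ?_⟩
  rw [hvch p]
  simp only [List.not_mem_nil, false_or, hmem p]

-- ---------- counting (fuel) ----------

def pvAllPos (h w : Nat) : List (Int × Int) :=
  (List.range h ×ˢ List.range w).map (fun rc => ((rc.1 : Int), (rc.2 : Int)))

lemma mem_pvAllPos {h w : Nat} {p : Int × Int} : p ∈ pvAllPos h w ↔ pvInB h w p := by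
  obtain ⟨a, b⟩ := p
  rw [pvAllPos, List.mem_map]
  constructor
  · rintro ⟨⟨r, c⟩, hm, heq⟩
    have hrc := List.pair_mem_product.mp hm
    simp only [List.mem_range] at hrc
    simp only [Prod.mk.injEq] at heq
    obtain ⟨e1, e2⟩ := heq
    refine ⟨?_, ?_, ?_, ?_⟩ <;> omega
  · rintro ⟨h1, h2, h3, h4⟩
    refine ⟨(a.toNat, b.toNat), List.pair_mem_product.mpr ⟨?_, ?_⟩, ?_⟩
    · simp only [List.mem_range]; omega
    · simp only [List.mem_range]; omega
    · simp only [Prod.mk.injEq]; constructor <;> omega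

lemma pvAllPos_nodup (h w : Nat) : (pvAllPos h w).Nodup := by
  apply List.Nodup.map ?_ (List.Nodup.product (List.nodup_range) (List.nodup_range))
  rintro ⟨x1, x2⟩ ⟨y1, y2⟩ hxy
  simp only [Prod.mk.injEq] at hxy ⊢
  omega

lemma pvAllPos_length (h w : Nat) : (pvAllPos h w).length = h * w := by
  simp [pvAllPos, List.length_product]

def pvUnvis (h w : Nat) (V : Int × Int → Prop) [DecidablePred V] : Nat :=
  ((pvAllPos h w).filter (fun p => decide (¬ V p))).length

lemma pvUnvis_le (h w : Nat) (V : Int × Int → Prop) [DecidablePred V] :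
    pvUnvis h w V ≤ h * w := by
  calc ((pvAllPos h w).filter _).length ≤ (pvAllPos h w).length := List.length_filter_le _ _
  _ = h * w := pvAllPos_length h w

lemma pvFilter_length_drop {α : Type} (l : List α) (hl : l.Nodup)
    (P P' : α → Prop) [DecidablePred P] [DecidablePred P'] (n : α)
    (hn : n ∈ l) (hPn : P n)
    (hP' : ∀ x, P' x ↔ P x ∧ x ≠ n) :
    (l.filter (fun x => decide (P' x))).length + 1 = (l.filter (fun x => decide (P x))).length := by
  induction l with
  | nil => cases hn
  | cons a t ih =>
    rw [List.filter_cons, List.filter_cons]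
    by_cases hna : a = n
    · subst hna
      have h1 : (decide (P' a)) = false := by simp [hP' a]
      have h2 : (decide (P a)) = true := by simpa
      have heq : t.filter (fun x => decide (P' x)) = t.filter (fun x => decide (P x)) := by
        apply List.filter_congr
        intro x hx
        have hxa : x ≠ a := by rintro rfl; exact (List.nodup_cons.mp hl).1 hx
        simp [hP' x, hxa]
      simp [h1, h2, heq]
    · have hat : n ∈ t := by
        rcases List.mem_cons.mp hn with hh | hh
        · exact absurd hh.symm hna
        · exact hh
      have ihh := ih (List.nodup_cons.mp hl).2 hat
      by_cases hPa : P a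
      · have hP'a : P' a := (hP' a).mpr ⟨hPa, hna⟩
        have e1 : (decide (P' a)) = true := by simp [hP'a]
        have e2 : (decide (P a)) = true := by simp [hPa]
        simp [e1, e2]
        omega
      · have hP'a : ¬ P' a := fun hc => hPa ((hP' a).mp hc).1
        have e1 : (decide (P' a)) = false := by simp [hP'a]
        have e2 : (decide (P a)) = false := by simp [hPa]
        rw [e1, e2]
        simp only [Bool.false_eq_true, if_false]
        omega

lemma pvUnvis_drop {h w : Nat} (V V' : Int × Int → Prop) [DecidablePred V] [DecidablePred V']
    (N : List (Int × Int)) (hN : N.Nodup)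
    (hmem : ∀ q ∈ N, pvInB h w q ∧ ¬ V q)
    (hV' : ∀ p, V' p ↔ V p ∨ p ∈ N) :
    pvUnvis h w V' + N.length = pvUnvis h w V := by
  induction N generalizing V' with
  | nil =>
    simp only [List.length_nil, Nat.add_zero, pvUnvis]
    congr 1
    apply List.filter_congr
    intro x hx
    simp [hV' x]
  | cons n t ih =>
    have step : pvUnvis h w V' + 1 = pvUnvis h w (fun p => V p ∨ p ∈ t) := by
      apply pvFilter_length_drop (pvAllPos h w) (pvAllPos_nodup h w)
        (fun p => ¬ (V p ∨ p ∈ t)) (fun p => ¬ V' p) n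
      · exact mem_pvAllPos.mpr (hmem n (by simp)).1
      · push_neg
        exact ⟨(hmem n (by simp)).2, (List.nodup_cons.mp hN).1⟩
      · intro x
        rw [hV' x]
        simp only [List.mem_cons]
        tauto
    have ihh := ih (V' := fun p => V p ∨ p ∈ t) (List.nodup_cons.mp hN).2
      (fun q hq => hmem q (by simp [hq])) (fun p => Iff.rfl)
    simp only [List.length_cons]
    omega

-- ---------- A-side visited matrix ----------

abbrev pvVisP (h w : Nat) (vis : List (List Bool)) (p : Int × Int) : Prop :=
  pvInB h w p ∧ pvVisRead vis p = true

def pvRect (h w : Nat) (vis : List (List Bool)) : Prop :=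
  vis.length = h ∧ ∀ row ∈ vis, row.length = w

lemma pvRect_init (h w : Nat) : pvRect h w (List.replicate h (List.replicate w false)) := by
  refine ⟨by simp, ?_⟩
  intro row hrow
  rw [List.eq_of_mem_replicate hrow]
  simp

lemma pvGetD_set (l : List (List Bool)) (i : Nat) (r' : List Bool) (i' : Nat) :
    (l.set i r').getD i' [] = if i = i' ∧ i < l.length then r' else l.getD i' [] := by
  by_cases hii : i = i'
  · subst hii
    by_cases hlen : i < l.length
    · simp [List.getD_eq_getElem?_getD, List.getElem?_set, hlen]
    · rw [List.set_eq_of_length_le (by omega)]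
      simp [hlen]
  · simp [List.getD_eq_getElem?_getD, List.getElem?_set, hii]

lemma pvGetD_set1 (r : List Bool) (j : Nat) (v : Bool) (j' : Nat) :
    (r.set j v).getD j' false = if j = j' ∧ j < r.length then v else r.getD j' false := by
  by_cases hii : j = j'
  · subst hii
    by_cases hlen : j < r.length
    · simp [List.getD_eq_getElem?_getD, List.getElem?_set, hlen]
    · rw [List.set_eq_of_length_le (by omega)]
      simp [hlen]
  · simp [List.getD_eq_getElem?_getD, List.getElem?_set, hii]

lemma pvVisP_init (h w : Nat) (q : Int × Int) :
    ¬ pvVisP h w (List.replicate h (List.replicate w false)) q := by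
  rintro ⟨hin, hread⟩
  rw [pvVisRead] at hread
  have hsel : (List.replicate h (List.replicate w false)).getD q.1.toNat []
      = List.replicate w false ∨
      (List.replicate h (List.replicate w false)).getD q.1.toNat [] = [] := by
    rcases Nat.lt_or_ge q.1.toNat h with hlt | hge
    · left
      rw [List.getD_eq_getElem?_getD, List.getElem?_replicate, if_pos hlt]
      rfl
    · right
      rw [List.getD_eq_getElem?_getD, List.getElem?_replicate, if_neg (by omega)]
      rfl
  rcases hsel with he | he <;> rw [he] at hread
  · rcases Nat.lt_or_ge q.2.toNat w with hlt | hge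
    · rw [List.getD_eq_getElem?_getD, List.getElem?_replicate, if_pos hlt] at hread
      simp at hread
    · rw [List.getD_eq_getElem?_getD, List.getElem?_replicate, if_neg (by omega)] at hread
      simp at hread
  · simp at hread

lemma pvRect_mark {h w : Nat} {vis : List (List Bool)} (hr : pvRect h w vis) (p : Int × Int) :
    pvRect h w (pvVisMark vis p) := by
  obtain ⟨h1, h2⟩ := hr
  by_cases hlt : p.1.toNat < vis.length
  · refine ⟨by simp [pvVisMark, h1], ?_⟩
    intro row hrow
    rcases List.mem_or_eq_of_mem_set hrow with h3 | h3
    · exact h2 row h3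
    · subst h3
      rw [List.length_set]
      have hget : vis.getD p.1.toNat [] = vis[p.1.toNat] := by
        rw [List.getD_eq_getElem?_getD, List.getElem?_eq_getElem hlt, Option.getD_some]
      rw [hget]
      exact h2 _ (List.getElem_mem hlt)
  · rw [pvVisMark, List.set_eq_of_length_le (by omega)]
    exact ⟨h1, h2⟩

lemma pvVisP_mark {h w : Nat} {vis : List (List Bool)} (hr : pvRect h w vis)
    {p : Int × Int} (hp : pvInB h w p) (q : Int × Int) :
    pvVisP h w (pvVisMark vis p) q ↔ pvVisP h w vis q ∨ q = p := by
  by_cases hq : pvInB h w q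
  · obtain ⟨hL, hW⟩ := hr
    have hi : p.1.toNat < vis.length := by omega
    have hrow : (vis.getD p.1.toNat []).length = w := by
      rw [List.getD_eq_getElem?_getD, List.getElem?_eq_getElem hi, Option.getD_some]
      exact hW _ (List.getElem_mem hi)
    have hread : pvVisRead (pvVisMark vis p) q =
        (if q.1.toNat = p.1.toNat ∧ q.2.toNat = p.2.toNat then true else pvVisRead vis q) := by
      rw [pvVisRead, pvVisMark, pvGetD_set]
      by_cases hij : p.1.toNat = q.1.toNat
      · rw [if_pos ⟨hij, hi⟩, pvGetD_set1]
        by_cases hcc : p.2.toNat = q.2.toNat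
        · rw [if_pos ⟨hcc, by omega⟩, if_pos (by omega)]
        · rw [if_neg (fun hcon => hcc hcon.1), if_neg (fun hcon => hcc hcon.2.symm)]
          rw [pvVisRead, hij]
      · rw [if_neg (fun hcon => hij hcon.1), if_neg (fun hcon => hij hcon.1.symm)]
        rfl
    constructor
    · rintro ⟨-, hrd⟩
      rw [hread] at hrd
      by_cases hceq : q.1.toNat = p.1.toNat ∧ q.2.toNat = p.2.toNat
      · right
        obtain ⟨c1, c2⟩ := hceq
        obtain ⟨a, b⟩ := q; obtain ⟨a', b'⟩ := p
        simp only [Prod.mk.injEq]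
        obtain ⟨e1, e2, e3, e4⟩ := hq
        obtain ⟨f1, f2, f3, f4⟩ := hp
        simp only at *
        omega
      · rw [if_neg hceq] at hrd
        exact Or.inl ⟨hq, hrd⟩
    · rintro (⟨-, hrd⟩ | rfl)
      · refine ⟨hq, ?_⟩
        rw [hread]
        split_ifs with hc
        · rfl
        · exact hrd
      · refine ⟨hq, ?_⟩
        rw [hread, if_pos ⟨rfl, rfl⟩]
  · constructor
    · rintro ⟨hin, -⟩; exact absurd hin hq
    · rintro (⟨hin, -⟩ | rfl)
      · exact absurd hin hq
      · exact absurd hp hq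

-- ---------- neighbour push fold (A side) ----------

lemma pvPushA (g : List (List Int)) (bg : Int) (h w : Nat) (l : List (Int × Int))
    (hl : l.Nodup) :
    ∀ (vis : List (List Bool)) (rest : List (Int × Int)), pvRect h w vis →
    ∃ (N : List (Int × Int)) (vis' : List (List Bool)),
      (l.foldl (fun st q =>
        if 0 ≤ q.1 ∧ q.1 < (h : Int) ∧ 0 ≤ q.2 ∧ q.2 < (w : Int) ∧
           pvVisRead st.1 q = false ∧ pvCell g q.1 q.2 ≠ bg
        then (pvVisMark st.1 q, q :: st.2) else st) (vis, rest)) = (vis', N.reverse ++ rest) ∧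
      N.Nodup ∧
      (∀ q, q ∈ N ↔ q ∈ l ∧ pvGood g bg h w q ∧ ¬ pvVisP h w vis q) ∧
      pvRect h w vis' ∧
      (∀ q, pvVisP h w vis' q ↔ pvVisP h w vis q ∨ q ∈ N) := by
  induction l with
  | nil =>
    intro vis rest hrect
    exact ⟨[], vis, by simp, by simp, by simp, hrect, by simp⟩
  | cons a t ih =>
    intro vis rest hrect
    obtain ⟨hat, htnd⟩ := List.nodup_cons.mp hl
    rw [List.foldl_cons]
    by_cases hc : 0 ≤ a.1 ∧ a.1 < (h : Int) ∧ 0 ≤ a.2 ∧ a.2 < (w : Int) ∧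
        pvVisRead vis a = false ∧ pvCell g a.1 a.2 ≠ bg
    · rw [if_pos hc]
      have hain : pvInB h w a := ⟨hc.1, hc.2.1, hc.2.2.1, hc.2.2.2.1⟩
      have hgood : pvGood g bg h w a := ⟨hain, hc.2.2.2.2.2⟩
      have hnv : ¬ pvVisP h w vis a := fun hv => by
        rw [hv.2] at hc
        exact absurd hc.2.2.2.2.1 (by simp)
      obtain ⟨N', vis', heq, hN'nd, hN'mem, hrect', hvis'⟩ :=
        ih htnd (pvVisMark vis a) (a :: rest) (pvRect_mark hrect a)
      have hmark := pvVisP_mark hrect hain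
      refine ⟨a :: N', vis', ?_, ?_, ?_, hrect', ?_⟩
      · rw [heq]
        simp
      · rw [List.nodup_cons]
        refine ⟨fun hc2 => ?_, hN'nd⟩
        have := ((hN'mem a).mp hc2).2.2
        exact this ((hmark a).mpr (Or.inr rfl))
      · intro q
        rw [List.mem_cons, hN'mem q]
        constructor
        · rintro (rfl | ⟨hq1, hq2, hq3⟩)
          · exact ⟨by simp, hgood, hnv⟩
          · refine ⟨by simp [hq1], hq2, fun hv => hq3 ((hmark q).mpr (Or.inl hv))⟩
        · rintro ⟨hq1, hq2, hq3⟩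
          rcases List.mem_cons.mp hq1 with rfl | hq1'
          · exact Or.inl rfl
          · refine Or.inr ⟨hq1', hq2, fun hv => ?_⟩
            rcases (hmark q).mp hv with hv' | rfl
            · exact hq3 hv'
            · exact hat hq1'
      · intro q
        rw [hvis' q, hmark q, List.mem_cons]
        tauto
    · rw [if_neg hc]
      obtain ⟨N', vis', heq, hN'nd, hN'mem, hrect', hvis'⟩ := ih htnd vis rest hrect
      refine ⟨N', vis', heq, hN'nd, ?_, hrect', hvis'⟩
      intro q
      rw [hN'mem q, List.mem_cons]
      constructor
      · rintro ⟨hq1, hq2, hq3⟩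
        exact ⟨Or.inr hq1, hq2, hq3⟩
      · rintro ⟨hq1, hq2, hq3⟩
        rcases hq1 with rfl | hq1'
        · exfalso
          apply hc
          obtain ⟨⟨e1, e2, e3, e4⟩, e5⟩ := hq2
          refine ⟨e1, e2, e3, e4, ?_, e5⟩
          by_cases hb : pvVisRead vis q = true
          · exact absurd ⟨⟨e1, e2, e3, e4⟩, hb⟩ hq3
          · simpa using hb
        · exact ⟨hq1', hq2, hq3⟩

-- ---------- flood loop run lemma (A side) ----------

lemma pvFloodA_run (g : List (List Int)) (bg : Int) (h w : Nat) (V0 : Int × Int → Prop)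
    (s : Int × Int)
    (hV0 : ∀ a, V0 a → ∀ q ∈ pvNbrs a, pvGood g bg h w q → V0 q)
    (hgs : pvGood g bg h w s) (hs0 : ¬ V0 s) :
    ∀ (fuel : Nat) (vis : List (List Bool)) (stk O : List (Int × Int))
      (obj0 : List (Int × Int × Int)),
    pvRect h w vis →
    PvFInv g bg h w V0 s (pvVisP h w vis) stk O →
    2 * pvUnvis h w (pvVisP h w vis) + stk.length ≤ fuel →
    ∃ (O' : List (Int × Int)) (vis' : List (List Bool)),
      pvFloodA g bg h w fuel vis stk (obj0 ++ O.map (fun p => (p.1, p.2, pvCell g p.1 p.2))) =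
        (obj0 ++ O'.map (fun p => (p.1, p.2, pvCell g p.1 p.2)), vis') ∧
      pvRect h w vis' ∧ O'.Nodup ∧
      (∀ p, p ∈ O' ↔ pvReach g bg h w s p) ∧
      (∀ p, pvVisP h w vis' p ↔ V0 p ∨ pvReach g bg h w s p) := by
  intro fuel
  induction fuel with
  | zero =>
    intro vis stk O obj0 hrect inv hfuel
    cases stk with
    | cons a t => exact absurd hfuel (by simp)
    | nil =>
      obtain ⟨hmem, hnd, hvch⟩ := PvFInv.terminal hV0 hgs hs0 inv
      exact ⟨O, vis, by simp [pvFloodA], hrect, hnd, hmem, hvch⟩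
  | succ fuel ih =>
    intro vis stk O obj0 hrect inv hfuel
    cases stk with
    | nil =>
      obtain ⟨hmem, hnd, hvch⟩ := PvFInv.terminal hV0 hgs hs0 inv
      exact ⟨O, vis, by simp [pvFloodA], hrect, hnd, hmem, hvch⟩
    | cons x rest =>
      obtain ⟨N, vis1, heq, hNnd, hNmem, hrect1, hvis1⟩ :=
        pvPushA g bg h w (pvNbrs x) (pvNbrs_nodup x) vis rest hrect
      have hrestnd : rest.Nodup :=
        (List.nodup_cons.mp (List.nodup_append.mp inv.nd).1).2
      have hVrest : ∀ p ∈ rest, pvVisP h w vis p := fun p hp =>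
        (inv.vch p).mpr (Or.inr (Or.inl (by simp [hp])))
      have hW'nd : (N.reverse ++ rest).Nodup := by
        rw [List.nodup_append]
        refine ⟨List.nodup_reverse.mpr hNnd, hrestnd, ?_⟩
        intro a ha b hb he
        subst he
        exact ((hNmem a).mp (List.mem_reverse.mp ha)).2.2 (hVrest a hb)
      have hW' : ∀ p, p ∈ N.reverse ++ rest ↔ p ∈ rest ∨ p ∈ N := by
        intro p
        rw [List.mem_append, List.mem_reverse]
        tauto
      have inv' : PvFInv g bg h w V0 s (pvVisP h w vis1) (N.reverse ++ rest) (O ++ [x]) :=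
        inv.stepx hNnd (fun q => hNmem q) hvis1 hW'nd hW'
      have hdrop := pvUnvis_drop (pvVisP h w vis) (pvVisP h w vis1) N hNnd
        (fun q hq => ⟨((hNmem q).mp hq).2.1.1, ((hNmem q).mp hq).2.2⟩) hvis1
      have hfuel' : 2 * pvUnvis h w (pvVisP h w vis1) + (N.reverse ++ rest).length ≤ fuel := by
        rw [List.length_append, List.length_reverse]
        simp only [List.length_cons] at hfuel
        omega
      obtain ⟨O', vis', heq', hrect', hnd', hmem', hvch'⟩ :=
        ih vis1 (N.reverse ++ rest) (O ++ [x]) obj0 hrect1 inv' hfuel'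
      refine ⟨O', vis', ?_, hrect', hnd', hmem', hvch'⟩
      show pvFloodA g bg h w (fuel + 1) vis (x :: rest) _ = _
      rw [pvFloodA]
      simp only [heq]
      rw [List.map_append, ← List.append_assoc] at heq'
      exact heq'

-- ---------- union-find (B side) ----------

-- parent pointers: every edge is between good cells of the same component and strictly decreasing
def pvPOK (g : List (List Int)) (bg : Int) (h w : Nat) (P : PySem.Dict Int Int) : Prop :=
  ∀ i j, P.get? i = some j → j < i ∧ ∃ p q : Int × Int, pvGood g bg h w p ∧ pvGood g bg h w q ∧
    i = pvIdx w p ∧ j = pvIdx w q ∧ pvReach g bg h w p q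

lemma ufFind_none (P : PySem.Dict Int Int) (n : Nat) (i : Int) (hi : P.get? i = none) :
    ufFind P n i = i := by
  cases n with
  | zero => rfl
  | succ n => simp [ufFind, hi]

lemma ufFind_some (P : PySem.Dict Int Int) (n : Nat) (i j : Int) (hi : P.get? i = some j)
    (hne : j ≠ i) : ufFind P (n + 1) i = ufFind P n j := by
  simp [ufFind, hi, hne]

lemma ufFind_root {g : List (List Int)} {bg : Int} {h w : Nat} {P : PySem.Dict Int Int}
    (hP : pvPOK g bg h w P) :
    ∀ (n : Nat) (p : Int × Int), pvGood g bg h w p → (pvIdx w p).toNat < n →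
    ∃ q, pvGood g bg h w q ∧ pvReach g bg h w p q ∧ ufFind P n (pvIdx w p) = pvIdx w q ∧
      P.get? (pvIdx w q) = none ∧ pvIdx w q ≤ pvIdx w p := by
  intro n
  induction n with
  | zero => intro p _ hlt; omega
  | succ n ih =>
    intro p hp hlt
    cases hget : P.get? (pvIdx w p) with
    | none =>
      exact ⟨p, hp, Relation.ReflTransGen.refl, ufFind_none P _ _ hget, hget, le_refl _⟩
    | some j =>
      obtain ⟨hji, p0, q0, hp0, hq0, hip, hjq, hreach⟩ := hP _ _ hget
      have hp0p : p0 = p := pvIdx_inj hp0.1 hp.1 hip.symm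
      subst hp0p
      have hjnn := pvIdx_nonneg hq0.1
      have hq0n : (pvIdx w q0).toNat < n := by omega
      obtain ⟨q, hq, hr, hfind, hnone, hle⟩ := ih q0 hq0 hq0n
      refine ⟨q, hq, hreach.trans hr, ?_, hnone, by omega⟩
      rw [ufFind_some P n _ j hget (by omega), hjq, hfind]

lemma pvPOK_insert {g : List (List Int)} {bg : Int} {h w : Nat} {P : PySem.Dict Int Int}
    (hP : pvPOK g bg h w P) {a b : Int} {pa pb : Int × Int}
    (hpa : pvGood g bg h w pa) (hpb : pvGood g bg h w pb)
    (ha : a = pvIdx w pa) (hb : b = pvIdx w pb) (hba : b < a)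
    (hr : pvReach g bg h w pa pb) :
    pvPOK g bg h w (P.insert a b) := by
  intro i j hget
  rw [PySem.Dict.get?_insert] at hget
  by_cases hia : i = a
  · rw [if_pos hia] at hget
    injection hget with hjb
    subst hia
    subst hjb
    exact ⟨hba, pa, pb, hpa, hpb, ha, hb, hr⟩
  · rw [if_neg hia] at hget
    exact hP _ _ hget

lemma ufFind_insert {g : List (List Int)} {bg : Int} {h w : Nat} {P : PySem.Dict Int Int}
    (hP : pvPOK g bg h w P) {a b : Int}
    (hra : P.get? a = none) (hrb : P.get? b = none) (hba : b < a) :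
    ∀ (n : Nat) (p : Int × Int), pvGood g bg h w p → (pvIdx w p).toNat < n →
    ufFind (P.insert a b) n (pvIdx w p) =
      (if ufFind P n (pvIdx w p) = a then b else ufFind P n (pvIdx w p)) := by
  intro n
  induction n with
  | zero => intro p _ hlt; omega
  | succ n ih =>
    intro p hp hlt
    by_cases hia : pvIdx w p = a
    · rw [hia, ufFind_none P _ _ hra, if_pos rfl]
      have hgb : (P.insert a b).get? a = some b := PySem.Dict.get?_insert_self P a b
      rw [ufFind_some (P.insert a b) n a b hgb (by omega)]
      apply ufFind_none
      rw [PySem.Dict.get?_insert, if_neg (by omega)]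
      exact hrb
    · cases hget : P.get? (pvIdx w p) with
      | none =>
        rw [ufFind_none P _ _ hget, if_neg hia]
        apply ufFind_none
        rw [PySem.Dict.get?_insert, if_neg hia]
        exact hget
      | some j =>
        obtain ⟨hji, p0, q0, hp0, hq0, hip, hjq, hreach⟩ := hP _ _ hget
        have hjnn := pvIdx_nonneg hq0.1
        have hget' : (P.insert a b).get? (pvIdx w p) = some j := by
          rw [PySem.Dict.get?_insert, if_neg hia]
          exact hget
        rw [ufFind_some (P.insert a b) n _ j hget' (by omega),
            ufFind_some P n _ j hget (by omega), hjq]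
        rw [ih q0 hq0 (by omega)]

-- ---------- construction of the parent map ----------

def pvUFbody (g : List (List Int)) (bg : Int) (h w : Nat)
    (P : PySem.Dict Int Int) (p : Int × Int) : PySem.Dict Int Int :=
  if pvCell g p.1 p.2 = bg then P
  else
    [(p.1 - 1, p.2), (p.1, p.2 - 1)].foldl (fun P n =>
      if 0 ≤ n.1 ∧ 0 ≤ n.2 ∧ pvCell g n.1 n.2 ≠ bg then
        let ri := ufFind P (h * w + 1) (p.1 * (w : Int) + p.2)
        let rj := ufFind P (h * w + 1) (n.1 * (w : Int) + n.2)
        if ri ≠ rj then (if ri < rj then P.insert rj ri else P.insert ri rj) else P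
      else P) P

def pvParentD (g : List (List Int)) (bg : Int) (h w : Nat) : PySem.Dict Int Int :=
  (pvAllPos h w).foldl (pvUFbody g bg h w) PySem.Dict.empty

def pvRootD (g : List (List Int)) (bg : Int) (h w : Nat) (i : Int) : Int :=
  ufFind (pvParentD g bg h w) (h * w + 1) i

-- invariant carried through the union loop
def pvUFInv (g : List (List Int)) (bg : Int) (h w : Nat) (done : List (Int × Int))
    (P : PySem.Dict Int Int) : Prop :=
  pvPOK g bg h w P ∧
  ∀ p ∈ done, ∀ n : Int × Int, pvGood g bg h w p → pvGood g bg h w n →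
    (n = (p.1 - 1, p.2) ∨ n = (p.1, p.2 - 1)) →
    ufFind P (h * w + 1) (pvIdx w p) = ufFind P (h * w + 1) (pvIdx w n)

lemma pvUFlink {g : List (List Int)} {bg : Int} {h w : Nat} {P : PySem.Dict Int Int}
    (hP : pvPOK g bg h w P) {p n : Int × Int}
    (hp : pvGood g bg h w p) (hn : pvGood g bg h w n) (hadj : n ∈ pvNbrs p)
    (P' : PySem.Dict Int Int)
    (hP' : P' = (if ufFind P (h*w+1) (pvIdx w p) ≠ ufFind P (h*w+1) (pvIdx w n) then
        (if ufFind P (h*w+1) (pvIdx w p) < ufFind P (h*w+1) (pvIdx w n) then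
          P.insert (ufFind P (h*w+1) (pvIdx w n)) (ufFind P (h*w+1) (pvIdx w p))
        else P.insert (ufFind P (h*w+1) (pvIdx w p)) (ufFind P (h*w+1) (pvIdx w n)))
      else P)) :
    pvPOK g bg h w P' ∧
    ufFind P' (h*w+1) (pvIdx w p) = ufFind P' (h*w+1) (pvIdx w n) ∧
    (∀ x y : Int × Int, pvGood g bg h w x → pvGood g bg h w y →
      ufFind P (h*w+1) (pvIdx w x) = ufFind P (h*w+1) (pvIdx w y) →
      ufFind P' (h*w+1) (pvIdx w x) = ufFind P' (h*w+1) (pvIdx w y)) := by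
  have hplt := pvIdx_toNat_lt hp.1
  have hnlt := pvIdx_toNat_lt hn.1
  obtain ⟨qp, hqp, hrp, hfp, hnp, hlep⟩ := ufFind_root hP (h*w+1) p hp (by omega)
  obtain ⟨qn, hqn, hrn, hfn, hnn, hlen⟩ := ufFind_root hP (h*w+1) n hn (by omega)
  have hreach_pn : pvReach g bg h w p n := Relation.ReflTransGen.single ⟨hadj, hn⟩
  have hqpqn : pvReach g bg h w qp qn :=
    ((pvReach_symm hp hrp).trans hreach_pn).trans hrn
  have hqnqp : pvReach g bg h w qn qp :=
    ((pvReach_symm hn hrn).trans (pvReach_symm hp hreach_pn)).trans hrp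
  by_cases hne : ufFind P (h*w+1) (pvIdx w p) ≠ ufFind P (h*w+1) (pvIdx w n)
  · rw [hP', if_pos hne]
    by_cases hlt : ufFind P (h*w+1) (pvIdx w p) < ufFind P (h*w+1) (pvIdx w n)
    · rw [if_pos hlt]
      have hba : pvIdx w qp < pvIdx w qn := by rw [← hfp, ← hfn]; exact hlt
      have hPOK' : pvPOK g bg h w (P.insert (ufFind P (h*w+1) (pvIdx w n)) (ufFind P (h*w+1) (pvIdx w p))) := by
        rw [hfp, hfn]
        exact pvPOK_insert hP hqn hqp rfl rfl hba hqnqp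
      have hins := ufFind_insert hP (a := ufFind P (h*w+1) (pvIdx w n))
        (b := ufFind P (h*w+1) (pvIdx w p)) (by rw [hfn]; exact hnn) (by rw [hfp]; exact hnp) hlt
      refine ⟨hPOK', ?_, ?_⟩
      · rw [hins (h*w+1) p hp (by omega), hins (h*w+1) n hn (by omega)]
        rw [if_neg hne, if_pos rfl]
      · intro x y hx hy hxy
        rw [hins (h*w+1) x hx (by have := pvIdx_toNat_lt hx.1; omega),
            hins (h*w+1) y hy (by have := pvIdx_toNat_lt hy.1; omega), hxy]
    · rw [if_neg hlt]
      have hlt' : ufFind P (h*w+1) (pvIdx w n) < ufFind P (h*w+1) (pvIdx w p) := by omega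
      have hba : pvIdx w qn < pvIdx w qp := by rw [← hfp, ← hfn]; exact hlt'
      have hPOK' : pvPOK g bg h w (P.insert (ufFind P (h*w+1) (pvIdx w p)) (ufFind P (h*w+1) (pvIdx w n))) := by
        rw [hfp, hfn]
        exact pvPOK_insert hP hqp hqn rfl rfl hba hqpqn
      have hins := ufFind_insert hP (a := ufFind P (h*w+1) (pvIdx w p))
        (b := ufFind P (h*w+1) (pvIdx w n)) (by rw [hfp]; exact hnp) (by rw [hfn]; exact hnn) hlt'
      refine ⟨hPOK', ?_, ?_⟩
      · rw [hins (h*w+1) p hp (by omega), hins (h*w+1) n hn (by omega)]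
        rw [if_pos rfl, if_neg (by omega)]
      · intro x y hx hy hxy
        rw [hins (h*w+1) x hx (by have := pvIdx_toNat_lt hx.1; omega),
            hins (h*w+1) y hy (by have := pvIdx_toNat_lt hy.1; omega), hxy]
  · rw [hP', if_neg hne]
    push_neg at hne
    exact ⟨hP, hne, fun x y _ _ hxy => hxy⟩

lemma pvUFstep {g : List (List Int)} {bg : Int} {h w : Nat} {done : List (Int × Int)}
    {P : PySem.Dict Int Int} {p : Int × Int} (hpin : pvInB h w p)
    (hinv : pvUFInv g bg h w done P) :
    pvUFInv g bg h w (done ++ [p]) (pvUFbody g bg h w P p) := by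
  obtain ⟨hPOK, hEdg⟩ := hinv
  by_cases hbg : pvCell g p.1 p.2 = bg
  · rw [pvUFbody, if_pos hbg]
    refine ⟨hPOK, ?_⟩
    intro x hx n hgx hgn hn
    rcases List.mem_append.mp hx with hx | hx
    · exact hEdg x hx n hgx hgn hn
    · simp only [List.mem_cons, List.not_mem_nil, or_false] at hx
      subst hx
      exact absurd hgx.2 (by simpa using hbg)
  · have hgp : pvGood g bg h w p := ⟨hpin, hbg⟩
    rw [pvUFbody, if_neg hbg]
    rw [List.foldl_cons, List.foldl_cons, List.foldl_nil]
    have hn1adj : ((p.1 - 1, p.2) : Int × Int) ∈ pvNbrs p := by simp [pvNbrs]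
    have hn2adj : ((p.1, p.2 - 1) : Int × Int) ∈ pvNbrs p := by simp [pvNbrs]
    -- the guard is true exactly when the neighbour is good
    have hguard : ∀ n : Int × Int, (n = (p.1 - 1, p.2) ∨ n = (p.1, p.2 - 1)) →
        ((0 ≤ n.1 ∧ 0 ≤ n.2 ∧ pvCell g n.1 n.2 ≠ bg) ↔ pvGood g bg h w n) := by
      rintro n (rfl | rfl)
      · constructor
        · rintro ⟨e1, e2, e3⟩
          refine ⟨⟨e1, ?_, e2, ?_⟩, e3⟩
          · have := hpin.2.1; simp only []; omega
          · exact hpin.2.2.2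
        · rintro ⟨⟨e1, _, e2, _⟩, e3⟩
          exact ⟨e1, e2, e3⟩
      · constructor
        · rintro ⟨e1, e2, e3⟩
          refine ⟨⟨e1, hpin.2.1, e2, ?_⟩, e3⟩
          have := hpin.2.2.2; simp only []; omega
        · rintro ⟨⟨e1, _, e2, _⟩, e3⟩
          exact ⟨e1, e2, e3⟩
    have step : ∀ (Q : PySem.Dict Int Int) (n : Int × Int),
        (n = (p.1 - 1, p.2) ∨ n = (p.1, p.2 - 1)) →
        pvPOK g bg h w Q →
        pvPOK g bg h w ((fun Q n =>
          if 0 ≤ n.1 ∧ 0 ≤ n.2 ∧ pvCell g n.1 n.2 ≠ bg then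
            let ri := ufFind Q (h * w + 1) (p.1 * (w : Int) + p.2)
            let rj := ufFind Q (h * w + 1) (n.1 * (w : Int) + n.2)
            if ri ≠ rj then (if ri < rj then Q.insert rj ri else Q.insert ri rj) else Q
          else Q) Q n) ∧
        (pvGood g bg h w n →
          ufFind ((fun Q n =>
          if 0 ≤ n.1 ∧ 0 ≤ n.2 ∧ pvCell g n.1 n.2 ≠ bg then
            let ri := ufFind Q (h * w + 1) (p.1 * (w : Int) + p.2)
            let rj := ufFind Q (h * w + 1) (n.1 * (w : Int) + n.2)
            if ri ≠ rj then (if ri < rj then Q.insert rj ri else Q.insert ri rj) else Q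
          else Q) Q n) (h*w+1) (pvIdx w p) =
          ufFind ((fun Q n =>
          if 0 ≤ n.1 ∧ 0 ≤ n.2 ∧ pvCell g n.1 n.2 ≠ bg then
            let ri := ufFind Q (h * w + 1) (p.1 * (w : Int) + p.2)
            let rj := ufFind Q (h * w + 1) (n.1 * (w : Int) + n.2)
            if ri ≠ rj then (if ri < rj then Q.insert rj ri else Q.insert ri rj) else Q
          else Q) Q n) (h*w+1) (pvIdx w n)) ∧
        (∀ x y : Int × Int, pvGood g bg h w x → pvGood g bg h w y →
          ufFind Q (h*w+1) (pvIdx w x) = ufFind Q (h*w+1) (pvIdx w y) →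
          ufFind ((fun Q n =>
          if 0 ≤ n.1 ∧ 0 ≤ n.2 ∧ pvCell g n.1 n.2 ≠ bg then
            let ri := ufFind Q (h * w + 1) (p.1 * (w : Int) + p.2)
            let rj := ufFind Q (h * w + 1) (n.1 * (w : Int) + n.2)
            if ri ≠ rj then (if ri < rj then Q.insert rj ri else Q.insert ri rj) else Q
          else Q) Q n) (h*w+1) (pvIdx w x) =
          ufFind ((fun Q n =>
          if 0 ≤ n.1 ∧ 0 ≤ n.2 ∧ pvCell g n.1 n.2 ≠ bg then
            let ri := ufFind Q (h * w + 1) (p.1 * (w : Int) + p.2)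
            let rj := ufFind Q (h * w + 1) (n.1 * (w : Int) + n.2)
            if ri ≠ rj then (if ri < rj then Q.insert rj ri else Q.insert ri rj) else Q
          else Q) Q n) (h*w+1) (pvIdx w y)) := by
      intro Q n hncase hQ
      by_cases hg : 0 ≤ n.1 ∧ 0 ≤ n.2 ∧ pvCell g n.1 n.2 ≠ bg
      · have hgn : pvGood g bg h w n := (hguard n hncase).mp hg
        have hadj : n ∈ pvNbrs p := by
          rcases hncase with rfl | rfl
          · exact hn1adj
          · exact hn2adj
        have hidp : p.1 * (w : Int) + p.2 = pvIdx w p := rfl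
        have hidn : n.1 * (w : Int) + n.2 = pvIdx w n := rfl
        have hlink := pvUFlink hQ hgp hgn hadj
          ((fun Q n =>
          if 0 ≤ n.1 ∧ 0 ≤ n.2 ∧ pvCell g n.1 n.2 ≠ bg then
            let ri := ufFind Q (h * w + 1) (p.1 * (w : Int) + p.2)
            let rj := ufFind Q (h * w + 1) (n.1 * (w : Int) + n.2)
            if ri ≠ rj then (if ri < rj then Q.insert rj ri else Q.insert ri rj) else Q
          else Q) Q n) (by simp only [if_pos hg, hidp, hidn])
        exact ⟨hlink.1, fun _ => hlink.2.1, hlink.2.2⟩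
      · simp only [if_neg hg]
        exact ⟨hQ, fun hgn => absurd ((hguard n hncase).mpr hgn) hg, fun _ _ _ _ hxy => hxy⟩
    obtain ⟨hQ1, hE1, hM1⟩ := step P (p.1 - 1, p.2) (Or.inl rfl) hPOK
    obtain ⟨hQ2, hE2, hM2⟩ := step _ (p.1, p.2 - 1) (Or.inr rfl) hQ1
    refine ⟨hQ2, ?_⟩
    intro x hx n hgx hgn hn
    rcases List.mem_append.mp hx with hx | hx
    · exact hM2 x n hgx hgn (hM1 x n hgx hgn (hEdg x hx n hgx hgn hn))
    · simp only [List.mem_cons, List.not_mem_nil, or_false] at hx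
      subst hx
      rcases hn with rfl | rfl
      · exact hM2 x _ hgx hgn (hE1 hgn)
      · exact hE2 hgn

lemma pvParentD_inv (g : List (List Int)) (bg : Int) (h w : Nat) :
    pvUFInv g bg h w (pvAllPos h w) (pvParentD g bg h w) := by
  rw [pvParentD]
  have base : pvUFInv g bg h w [] PySem.Dict.empty := by
    constructor
    · intro i j hget
      rw [PySem.Dict.get?_empty] at hget
      cases hget
    · intro p hp
      cases hp
  have main : ∀ (l done : List (Int × Int)) (P : PySem.Dict Int Int),
      (∀ q ∈ l, pvInB h w q) → pvUFInv g bg h w done P →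
      pvUFInv g bg h w (done ++ l) (l.foldl (pvUFbody g bg h w) P) := by
    intro l
    induction l with
    | nil => intro done P _ hinv; simpa using hinv
    | cons a t ih =>
      intro done P hmem hinv
      rw [List.foldl_cons]
      have hres := ih (done ++ [a]) (pvUFbody g bg h w P a) (fun q hq => hmem q (by simp [hq]))
        (pvUFstep (hmem a (by simp)) hinv)
      simpa using hres
  have hres := main (pvAllPos h w) [] PySem.Dict.empty (fun q hq => mem_pvAllPos.mp hq) base
  simpa using hres

-- ---------- consequences of the union-find invariant ----------

lemma pvRoot_edge {g : List (List Int)} {bg : Int} {h w : Nat} {p q : Int × Int}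
    (hp : pvGood g bg h w p) (hq : pvGood g bg h w q) (hadj : q ∈ pvNbrs p) :
    pvRootD g bg h w (pvIdx w p) = pvRootD g bg h w (pvIdx w q) := by
  obtain ⟨hPOK, hEdg⟩ := pvParentD_inv g bg h w
  have hmem : ∀ x : Int × Int, pvGood g bg h w x → x ∈ pvAllPos h w :=
    fun x hx => mem_pvAllPos.mpr hx.1
  obtain ⟨a, b⟩ := p
  obtain ⟨c, d⟩ := q
  simp only [pvNbrs, List.mem_cons, List.not_mem_nil, or_false, Prod.mk.injEq] at hadj
  rcases hadj with ⟨rfl, rfl⟩ | ⟨rfl, rfl⟩ | ⟨rfl, rfl⟩ | ⟨rfl, rfl⟩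
  · exact hEdg _ (hmem _ hp) _ hp hq (Or.inl rfl)
  · exact (hEdg _ (hmem _ hq) _ hq hp (Or.inl (by simp))).symm
  · exact hEdg _ (hmem _ hp) _ hp hq (Or.inr rfl)
  · exact (hEdg _ (hmem _ hq) _ hq hp (Or.inr (by simp))).symm

lemma pvRoot_reach {g : List (List Int)} {bg : Int} {h w : Nat} {p q : Int × Int}
    (hp : pvGood g bg h w p) (hr : pvReach g bg h w p q) :
    pvRootD g bg h w (pvIdx w p) = pvRootD g bg h w (pvIdx w q) := by
  induction hr with
  | refl => rfl
  | tail hr' hstep ih =>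
    rename_i b c
    have hb : pvGood g bg h w b := by
      rcases pvReach_good hr' with rfl | hg
      · exact hp
      · exact hg
    exact ih.trans (pvRoot_edge hb hstep.2 hstep.1)

lemma pvRoot_char {g : List (List Int)} {bg : Int} {h w : Nat} {p : Int × Int}
    (hp : pvGood g bg h w p) :
    ∃ m, pvGood g bg h w m ∧ pvReach g bg h w p m ∧
      pvRootD g bg h w (pvIdx w p) = pvIdx w m ∧
      (∀ y, pvGood g bg h w y → pvReach g bg h w p y → pvIdx w m ≤ pvIdx w y) := by
  obtain ⟨hPOK, hEdg⟩ := pvParentD_inv g bg h w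
  have hplt := pvIdx_toNat_lt hp.1
  obtain ⟨m, hm, hrm, hfm, hnm, hlem⟩ := ufFind_root hPOK (h*w+1) p hp (by omega)
  refine ⟨m, hm, hrm, hfm, ?_⟩
  intro y hy hry
  have hylt := pvIdx_toNat_lt hy.1
  obtain ⟨my, hmy, hrmy, hfmy, hnmy, hlemy⟩ := ufFind_root hPOK (h*w+1) y hy (by omega)
  have heq : pvRootD g bg h w (pvIdx w p) = pvRootD g bg h w (pvIdx w y) :=
    pvRoot_reach hp hry
  rw [pvRootD, pvRootD, hfm, hfmy] at heq
  omega

lemma pvRoot_fix_iff {g : List (List Int)} {bg : Int} {h w : Nat} {s : Int × Int}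
    (hs : pvGood g bg h w s) :
    pvRootD g bg h w (pvIdx w s) = pvIdx w s ↔
      (∀ y, pvGood g bg h w y → pvReach g bg h w s y → pvIdx w s ≤ pvIdx w y) := by
  obtain ⟨m, hm, hrm, hfm, hmin⟩ := pvRoot_char hs
  constructor
  · intro hfix y hy hry
    have he : pvIdx w m = pvIdx w s := by rw [← hfm, hfix]
    have hms : m = s := pvIdx_inj hm.1 hs.1 he
    subst hms
    exact hmin y hy hry
  · intro hminS
    have h1 : pvIdx w s ≤ pvIdx w m := hminS m hm hrm
    have h2 : pvIdx w m ≤ pvIdx w s := hmin s hs Relation.ReflTransGen.refl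
    rw [hfm]
    omega

lemma pvRoot_val {g : List (List Int)} {bg : Int} {h w : Nat} {s q : Int × Int}
    (hs : pvGood g bg h w s) (hfix : pvRootD g bg h w (pvIdx w s) = pvIdx w s)
    (hq : pvGood g bg h w q) :
    pvRootD g bg h w (pvIdx w q) = pvIdx w s ↔ pvReach g bg h w s q := by
  constructor
  · intro hroot
    obtain ⟨m, hm, hrm, hfm, hmin⟩ := pvRoot_char hq
    have he : pvIdx w m = pvIdx w s := by rw [← hfm, hroot]
    have hms : m = s := pvIdx_inj hm.1 hs.1 he
    subst hms
    exact pvReach_symm hq hrm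
  · intro hreach
    rw [← pvRoot_reach hs hreach, hfix]

-- the rep of any good cell: the minimum of its component, and it is root-fixed
lemma pvRep_exists {g : List (List Int)} {bg : Int} {h w : Nat} {p : Int × Int}
    (hp : pvGood g bg h w p) :
    ∃ m, pvGood g bg h w m ∧ pvReach g bg h w m p ∧ pvIdx w m ≤ pvIdx w p ∧
      pvRootD g bg h w (pvIdx w m) = pvIdx w m ∧
      pvRootD g bg h w (pvIdx w p) = pvIdx w m := by
  obtain ⟨m, hm, hrm, hfm, hmin⟩ := pvRoot_char hp
  have hfix : pvRootD g bg h w (pvIdx w m) = pvIdx w m := by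
    rw [pvRoot_fix_iff hm]
    intro y hy hry
    exact hmin y hy (hrm.trans hry)
  exact ⟨m, hm, pvReach_symm hp hrm, hmin p hp Relation.ReflTransGen.refl, hfix, hfm⟩

-- ---------- canonical components ----------

def pvRepP (g : List (List Int)) (bg : Int) (h w : Nat) (s : Int × Int) : Bool :=
  decide (pvCell g s.1 s.2 ≠ bg) && (pvRootD g bg h w (pvIdx w s) == pvIdx w s)

def pvRepsL (g : List (List Int)) (bg : Int) (h w : Nat) : List (Int × Int) :=
  (pvAllPos h w).filter (pvRepP g bg h w)

def pvGoodCells (g : List (List Int)) (bg : Int) (h w : Nat) : List (Int × Int) :=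
  (pvAllPos h w).filter (fun q => decide (pvCell g q.1 q.2 ≠ bg))

def pvBucket (g : List (List Int)) (bg : Int) (h w : Nat) (c : Int) : List (Int × Int) :=
  (pvGoodCells g bg h w).filter (fun q => pvRootD g bg h w (pvIdx w q) == c)

lemma mem_pvGoodCells {g : List (List Int)} {bg : Int} {h w : Nat} {q : Int × Int} :
    q ∈ pvGoodCells g bg h w ↔ pvGood g bg h w q := by
  rw [pvGoodCells, List.mem_filter, mem_pvAllPos]
  simp [pvGood]

lemma mem_pvRepsL {g : List (List Int)} {bg : Int} {h w : Nat} {s : Int × Int} :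
    s ∈ pvRepsL g bg h w ↔
      pvGood g bg h w s ∧ pvRootD g bg h w (pvIdx w s) = pvIdx w s := by
  rw [pvRepsL, List.mem_filter, mem_pvAllPos, pvRepP]
  simp only [Bool.and_eq_true, decide_eq_true_eq, beq_iff_eq]
  tauto

lemma mem_pvBucket {g : List (List Int)} {bg : Int} {h w : Nat} {s q : Int × Int}
    (hs : pvGood g bg h w s) (hfix : pvRootD g bg h w (pvIdx w s) = pvIdx w s) :
    q ∈ pvBucket g bg h w (pvIdx w s) ↔ pvReach g bg h w s q := by
  rw [pvBucket, List.mem_filter, mem_pvGoodCells]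
  constructor
  · rintro ⟨hgq, hroot⟩
    exact (pvRoot_val hs hfix hgq).mp (by simpa using hroot)
  · intro hreach
    have hgq : pvGood g bg h w q := by
      rcases pvReach_good hreach with rfl | hg
      · exact hs
      · exact hg
    exact ⟨hgq, by simp [(pvRoot_val hs hfix hgq).mpr hreach]⟩

lemma pvBucket_nodup (g : List (List Int)) (bg : Int) (h w : Nat) (c : Int) :
    (pvBucket g bg h w c).Nodup :=
  ((pvAllPos_nodup h w).filter _).filter _

-- ---------- fold reshaping ----------

lemma pvFoldl_flatMap {α β γ : Type} (l : List α) (f : α → List β) (F : γ → β → γ) :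
    ∀ (i : γ), (l.flatMap f).foldl F i = l.foldl (fun a x => (f x).foldl F a) i := by
  induction l with
  | nil => intro i; rfl
  | cons a t ih =>
    intro i
    rw [List.flatMap_cons, List.foldl_append, List.foldl_cons, ih]

lemma pvAllPos_succ (h w : Nat) :
    pvAllPos (h + 1) w
      = pvAllPos h w ++ (List.range w).map (fun (c : Nat) => ((h : Int), (c : Int))) := by
  show ((List.range (h+1)).flatMap
      (fun (r : Nat) => (List.range w).map (fun (c : Nat) => (r, c)))).map
      (fun rc => ((rc.1 : Int), (rc.2 : Int))) = _
  rw [List.range_succ, List.flatMap_append, List.map_append]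
  congr 1
  have hsing : ([h] : List Nat).flatMap (fun (r : Nat) => (List.range w).map (fun (c : Nat) => (r, c)))
      = (List.range w).map (fun (c : Nat) => (h, c)) := by simp
  rw [hsing, List.map_map]
  rfl

lemma pvFoldl_nested (h w : Nat) {σ : Type} (f : σ → Int × Int → σ) :
    ∀ (init : σ),
    (List.range h).foldl
      (fun st (r : Nat) =>
        (List.range w).foldl (fun st (c : Nat) => f st ((r : Int), (c : Int))) st) init
      = (pvAllPos h w).foldl f init := by
  induction h with
  | zero => intro init; rfl
  | succ h ih =>
    intro init
    rw [List.range_succ, List.foldl_append, ih, pvAllPos_succ, List.foldl_append]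
    simp [List.foldl_map]

lemma pvAllPos_pairwise (h w : Nat) :
    (pvAllPos h w).Pairwise (fun p q => pvIdx w p < pvIdx w q) := by
  induction h with
  | zero => exact List.Pairwise.nil
  | succ h ih =>
    rw [pvAllPos_succ, List.pairwise_append]
    refine ⟨ih, ?_, ?_⟩
    · apply List.Pairwise.map (R := fun (a b : Nat) => a < b)
      · intro a b hab
        show pvIdx w ((h : Int), (a : Int)) < pvIdx w ((h : Int), (b : Int))
        unfold pvIdx
        simp only []
        omega
      · exact List.pairwise_lt_range
    · intro p hp q hq
      obtain ⟨c, hc, rfl⟩ := List.mem_map.mp hq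
      have hpin : pvInB h w p := mem_pvAllPos.mp hp
      have h1 : pvIdx w p < (h : Int) * w := pvIdx_lt hpin
      show pvIdx w p < pvIdx w ((h : Int), (c : Int))
      unfold pvIdx at h1 ⊢
      simp only []
      have h2 : (0 : Int) ≤ (c : Int) := by positivity
      omega

lemma pvRepsL_pairwise (g : List (List Int)) (bg : Int) (h w : Nat) :
    (pvRepsL g bg h w).Pairwise (fun p q => pvIdx w p < pvIdx w q) :=
  (pvAllPos_pairwise h w).filter _

-- ---------- write phase: small algebra ----------

lemma pvGetD_set' {α : Type} (l : List α) (d : α) (i : Nat) (a : α) (i' : Nat) :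
    (l.set i a).getD i' d = if i = i' ∧ i < l.length then a else l.getD i' d := by
  by_cases hii : i = i'
  · subst hii
    by_cases hlen : i < l.length
    · simp [List.getD_eq_getElem?_getD, List.getElem?_set, hlen]
    · rw [List.set_eq_of_length_le (by omega)]
      simp [hlen]
  · simp [List.getD_eq_getElem?_getD, List.getElem?_set, hii]

def pvW (res : List (List Int)) (i j : Nat) (v : Int) : List (List Int) :=
  res.set i ((res.getD i []).set j v)

lemma pvW_comm (res : List (List Int)) (i1 j1 i2 j2 : Nat) (v1 v2 : Int)
    (hne : ¬ (i1 = i2 ∧ j1 = j2)) :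
    pvW (pvW res i1 j1 v1) i2 j2 v2 = pvW (pvW res i2 j2 v2) i1 j1 v1 := by
  by_cases hii : i1 = i2
  · subst hii
    have hjj : j1 ≠ j2 := fun hj => hne ⟨rfl, hj⟩
    by_cases hlen : i1 < res.length
    · rw [pvW, pvW, pvW, pvW]
      rw [pvGetD_set' res [] i1 _ i1, if_pos ⟨rfl, hlen⟩,
          pvGetD_set' res [] i1 _ i1, if_pos ⟨rfl, hlen⟩]
      rw [List.set_set, List.set_set, List.set_comm _ _ hjj]
    · have e1 : ∀ r, res.set i1 r = res := fun r => List.set_eq_of_length_le (by omega)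
      simp [pvW, e1]
  · rw [pvW, pvW, pvW, pvW]
    rw [pvGetD_set' res [] i1 _ i2, if_neg (fun hc => hii hc.1),
        pvGetD_set' res [] i2 _ i1, if_neg (fun hc => hii (hc.1.symm))]
    rw [List.set_comm _ _ (by omega)]

lemma pvExtremalMin (l1 l2 : List Int) (a : Int) (hne : l1 ≠ [])
    (hm : ∀ x, x ∈ l1 ↔ x ∈ l2) (ha : a ∈ l1) :
    pvMinL l1 = l2.foldl min a := by
  cases l1 with
  | nil => exact absurd rfl hne
  | cons b t =>
    have hdef : pvMinL (b :: t) = t.foldl min b := rfl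
    have h1 := PySem.List.foldl_min_le t b
    have h1m := PySem.List.foldl_min_mem t b
    have h2 := PySem.List.foldl_min_le l2 a
    have h2m := PySem.List.foldl_min_mem l2 a
    have hM1le : ∀ y ∈ b :: t, t.foldl min b ≤ y := by
      intro y hy
      rcases List.mem_cons.mp hy with rfl | hy'
      · exact h1.1
      · exact h1.2 y hy'
    have hM1mem : t.foldl min b ∈ b :: t := by
      rcases h1m with he | he
      · rw [he]; simp
      · exact List.mem_cons_of_mem _ he
    have hM2le : ∀ y ∈ l2, List.foldl min a l2 ≤ y := h2.2
    have hM2mem : List.foldl min a l2 ∈ b :: t := by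
      rcases h2m with he | he
      · rw [he]; exact ha
      · exact (hm _).mpr he
    rw [hdef]
    apply le_antisymm
    · exact hM1le _ hM2mem
    · exact hM2le _ ((hm _).mp hM1mem)

lemma pvExtremalMax (l1 l2 : List Int) (a : Int) (hne : l1 ≠ [])
    (hm : ∀ x, x ∈ l1 ↔ x ∈ l2) (ha : a ∈ l1) :
    pvMaxL l1 = l2.foldl max a := by
  cases l1 with
  | nil => exact absurd rfl hne
  | cons b t =>
    have hdef : pvMaxL (b :: t) = t.foldl max b := rfl
    have h1 := PySem.List.le_foldl_max t b
    have h1m := PySem.List.foldl_max_mem t b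
    have h2 := PySem.List.le_foldl_max l2 a
    have h2m := PySem.List.foldl_max_mem l2 a
    have hM1le : ∀ y ∈ b :: t, y ≤ t.foldl max b := by
      intro y hy
      rcases List.mem_cons.mp hy with rfl | hy'
      · exact h1.1
      · exact h1.2 y hy'
    have hM1mem : t.foldl max b ∈ b :: t := by
      rcases h1m with he | he
      · rw [he]; simp
      · exact List.mem_cons_of_mem _ he
    have hM2mem : List.foldl max a l2 ∈ b :: t := by
      rcases h2m with he | he
      · rw [he]; exact ha
      · exact (hm _).mpr he
    rw [hdef]
    apply le_antisymm
    · exact h2.2 _ ((hm _).mp hM1mem)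
    · exact hM1le _ hM2mem

lemma pvMinL_perm {l1 l2 : List Int} (hp : l1.Perm l2) : pvMinL l1 = pvMinL l2 := by
  cases l2 with
  | nil => rw [List.perm_nil.mp hp]
  | cons b t =>
    have hne : l1 ≠ [] := by
      intro he
      rw [he] at hp
      exact absurd hp.symm (by simp)
    have hb : b ∈ l1 := hp.mem_iff.mpr (by simp)
    have hres := pvExtremalMin l1 (b :: t) b hne (fun x => hp.mem_iff) hb
    rw [hres, List.foldl_cons, min_self]
    rfl

lemma pvMaxL_perm {l1 l2 : List Int} (hp : l1.Perm l2) : pvMaxL l1 = pvMaxL l2 := by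
  cases l2 with
  | nil => rw [List.perm_nil.mp hp]
  | cons b t =>
    have hne : l1 ≠ [] := by
      intro he
      rw [he] at hp
      exact absurd hp.symm (by simp)
    have hb : b ∈ l1 := hp.mem_iff.mpr (by simp)
    have hres := pvExtremalMax l1 (b :: t) b hne (fun x => hp.mem_iff) hb
    rw [hres, List.foldl_cons, max_self]
    rfl

lemma pvMinL_le {l : List Int} {x : Int} (hx : x ∈ l) : pvMinL l ≤ x := by
  cases l with
  | nil => cases hx
  | cons b t =>
    have h1 := PySem.List.foldl_min_le t b
    rcases List.mem_cons.mp hx with rfl | hx'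
    · exact h1.1
    · exact h1.2 x hx'

lemma pvLe_maxL {l : List Int} {x : Int} (hx : x ∈ l) : x ≤ pvMaxL l := by
  cases l with
  | nil => cases hx
  | cons b t =>
    have h1 := PySem.List.le_foldl_max t b
    rcases List.mem_cons.mp hx with rfl | hx'
    · exact h1.1
    · exact h1.2 x hx'

-- ---------- A's outer loop, related to the canonical components ----------

def pvApplyA (g : List (List Int)) (hh : Nat) (res : List (List Int))
    (objs : List (List (Int × Int × Int))) : List (List Int) :=
  objs.foldl (fun res obj =>
    let r0 := pvMinL (obj.map (fun t => t.1))
    let _c0 := pvMinL (obj.map (fun t => t.2.1))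
    let r1 := pvMaxL (obj.map (fun t => t.1))
    let _c1 := pvMaxL (obj.map (fun t => t.2.1))
    let oh := r1 - r0 + 1
    obj.foldl (fun res t =>
      let nr := t.1 + oh + 1
      if 0 ≤ nr ∧ nr < (hh : Int) then
        res.set nr.toNat ((res.getD nr.toNat []).set t.2.1.toNat t.2.2)
      else res) res) res

def pvStepA (g : List (List Int)) (bg : Int) (h w : Nat)
    (st : List (List Bool) × List (List (Int × Int × Int))) (p : Int × Int) :
    List (List Bool) × List (List (Int × Int × Int)) :=
  if pvVisRead st.1 p = false ∧ pvCell g p.1 p.2 ≠ bg then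
    let fl := pvFloodA g bg h w (2 * h * w + 1) (pvVisMark st.1 p) [p] []
    (fl.2, st.2 ++ [fl.1])
  else st

lemma pvA_eq (g : List (List Int)) :
    duplicate_objs_v g
      = pvApplyA g g.length (g.map (fun row => row)) (pvObjectsA g (pvBgA g)) := rfl

lemma pvObjectsA_eq (g : List (List Int)) (bg : Int) :
    pvObjectsA g bg =
      ((pvAllPos g.length (g.headD []).length).foldl
        (pvStepA g bg g.length (g.headD []).length)
        (List.replicate g.length (List.replicate (g.headD []).length false), [])).2 := by
  have hfun : ∀ (st : List (List Bool) × List (List (Int × Int × Int))) (r c : Nat),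
      (let p : Int × Int := ((r : Int), (c : Int))
       if pvVisRead st.1 p = false ∧ pvCell g p.1 p.2 ≠ bg then
         let fl := pvFloodA g bg g.length (g.headD []).length
           (2 * g.length * (g.headD []).length + 1) (pvVisMark st.1 p) [p] []
         (fl.2, st.2 ++ [fl.1])
       else st) = pvStepA g bg g.length (g.headD []).length st ((r : Int), (c : Int)) :=
    fun _ _ _ => rfl
  unfold pvObjectsA
  simp only [hfun]
  rw [pvFoldl_nested]

lemma pvBg_alt (g : List (List Int)) :
    pvMostCommon1 ((g.flatMap (fun row => row)).foldl
      (fun d v => PySem.Dict.modify d v 0 (· + 1)) (PySem.Dict.empty : PySem.Dict Int Int)).items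
    = pvBgA g := by
  rw [pvBgA]
  congr 2
  exact pvFoldl_flatMap g (fun row => row) _ _

-- B's per-group write, also the canonical write of one component
def pvWriteC (g : List (List Int)) (hh : Nat) (cells : List (Int × Int))
    (res : List (List Int)) : List (List Int) :=
  let rows := cells.map Prod.fst
  let shift := pvMaxL rows - pvMinL rows + 2
  cells.foldl (fun res p =>
    if p.1 + shift < (hh : Int) then
      res.set (p.1 + shift).toNat
        ((res.getD (p.1 + shift).toNat []).set p.2.toNat (pvCell g p.1 p.2))
    else res) res

-- writing one of A's objects equals the canonical write of the same cell set
lemma pvWriteOne (g : List (List Int)) (hh : Nat) (O X : List (Int × Int))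
    (hperm : O.Perm X) (hgood : ∀ q ∈ O, 0 ≤ q.1 ∧ 0 ≤ q.2) (res : List (List Int)) :
    pvApplyA g hh res [O.map (fun p => (p.1, p.2, pvCell g p.1 p.2))] = pvWriteC g hh X res := by
  have hrows : (O.map (fun p => (p.1, p.2, pvCell g p.1 p.2))).map (fun t => t.1)
      = O.map Prod.fst := by
    rw [List.map_map]
    rfl
  have hpermrows : (O.map Prod.fst).Perm (X.map Prod.fst) := hperm.map _
  have hr0 : pvMinL ((O.map (fun p => (p.1, p.2, pvCell g p.1 p.2))).map (fun t => t.1))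
      = pvMinL (X.map Prod.fst) := by rw [hrows]; exact pvMinL_perm hpermrows
  have hr1 : pvMaxL ((O.map (fun p => (p.1, p.2, pvCell g p.1 p.2))).map (fun t => t.1))
      = pvMaxL (X.map Prod.fst) := by rw [hrows]; exact pvMaxL_perm hpermrows
  set rmin := pvMinL (X.map Prod.fst) with hrmin
  set rmax := pvMaxL (X.map Prod.fst) with hrmax
  have hbound : ∀ q ∈ O, rmin ≤ q.1 ∧ q.1 ≤ rmax := by
    intro q hq
    have hq1 : q.1 ∈ X.map Prod.fst := List.mem_map_of_mem (hperm.mem_iff.mp hq)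
    exact ⟨pvMinL_le hq1, pvLe_maxL hq1⟩
  have hXgood : ∀ q ∈ X, 0 ≤ q.1 ∧ 0 ≤ q.2 := fun q hq => hgood q (hperm.mem_iff.mpr hq)
  have hXbound : ∀ q ∈ X, rmin ≤ q.1 ∧ q.1 ≤ rmax := fun q hq =>
    hbound q (hperm.mem_iff.mpr hq)
  have happ : pvApplyA g hh res [O.map (fun p => (p.1, p.2, pvCell g p.1 p.2))]
      = (O.map (fun p => (p.1, p.2, pvCell g p.1 p.2))).foldl (fun res t =>
          if 0 ≤ t.1 + (rmax - rmin + 1) + 1 ∧ t.1 + (rmax - rmin + 1) + 1 < (hh : Int) then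
            res.set (t.1 + (rmax - rmin + 1) + 1).toNat
              ((res.getD (t.1 + (rmax - rmin + 1) + 1).toNat []).set t.2.1.toNat t.2.2)
          else res) res := by
    rw [pvApplyA, List.foldl_cons, List.foldl_nil, hr0, hr1]
  rw [happ, List.foldl_map]
  have hstep1 : ∀ (r : List (List Int)),
      O.foldl (fun res q =>
        if 0 ≤ q.1 + (rmax - rmin + 1) + 1 ∧ q.1 + (rmax - rmin + 1) + 1 < (hh : Int) then
          res.set (q.1 + (rmax - rmin + 1) + 1).toNat
            ((res.getD (q.1 + (rmax - rmin + 1) + 1).toNat []).set q.2.toNat (pvCell g q.1 q.2))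
        else res) r
      = O.foldl (fun res q =>
        if q.1 + (rmax - rmin + 2) < (hh : Int) then
          res.set (q.1 + (rmax - rmin + 2)).toNat
            ((res.getD (q.1 + (rmax - rmin + 2)).toNat []).set q.2.toNat (pvCell g q.1 q.2))
        else res) r := by
    intro r
    apply PySem.List.foldl_congr_mem
    intro acc q hq
    obtain ⟨hq1, hq2⟩ := hgood q hq
    obtain ⟨hb1, hb2⟩ := hbound q hq
    have he : q.1 + (rmax - rmin + 1) + 1 = q.1 + (rmax - rmin + 2) := by ring
    rw [he]
    have hiff : (0 ≤ q.1 + (rmax - rmin + 2) ∧ q.1 + (rmax - rmin + 2) < (hh : Int))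
        ↔ (q.1 + (rmax - rmin + 2) < (hh : Int)) := by
      constructor
      · exact fun hc => hc.2
      · exact fun hc => ⟨by omega, hc⟩
    rw [if_congr hiff rfl rfl]
  have hstep2 : O.foldl (fun res q =>
        if q.1 + (rmax - rmin + 2) < (hh : Int) then
          res.set (q.1 + (rmax - rmin + 2)).toNat
            ((res.getD (q.1 + (rmax - rmin + 2)).toNat []).set q.2.toNat (pvCell g q.1 q.2))
        else res) res
      = X.foldl (fun res q =>
        if q.1 + (rmax - rmin + 2) < (hh : Int) then
          res.set (q.1 + (rmax - rmin + 2)).toNat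
            ((res.getD (q.1 + (rmax - rmin + 2)).toNat []).set q.2.toNat (pvCell g q.1 q.2))
        else res) res := by
    apply List.Perm.foldl_eq' hperm
    intro x hx y hy z
    by_cases hxy : x = y
    · subst hxy; rfl
    · obtain ⟨hx1, hx2⟩ := hgood x hx
      obtain ⟨hy1, hy2⟩ := hgood y hy
      obtain ⟨hbx1, hbx2⟩ := hbound x hx
      obtain ⟨hby1, hby2⟩ := hbound y hy
      by_cases gx : x.1 + (rmax - rmin + 2) < (hh : Int) <;>
        by_cases gy : y.1 + (rmax - rmin + 2) < (hh : Int)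
      · simp only [if_pos gx, if_pos gy]
        show pvW (pvW z (x.1 + (rmax - rmin + 2)).toNat x.2.toNat (pvCell g x.1 x.2))
            (y.1 + (rmax - rmin + 2)).toNat y.2.toNat (pvCell g y.1 y.2)
          = pvW (pvW z (y.1 + (rmax - rmin + 2)).toNat y.2.toNat (pvCell g y.1 y.2))
            (x.1 + (rmax - rmin + 2)).toNat x.2.toNat (pvCell g x.1 x.2)
        rw [pvW_comm]
        rintro ⟨e1, e2⟩
        apply hxy
        have hx0 : (0 : Int) ≤ x.1 + (rmax - rmin + 2) := by omega
        have hy0 : (0 : Int) ≤ y.1 + (rmax - rmin + 2) := by omega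
        have e1' : x.1 = y.1 := by omega
        have e2' : x.2 = y.2 := by omega
        exact Prod.ext e1' e2'
      · simp only [if_pos gx, if_neg gy]
      · simp only [if_neg gx, if_pos gy]
      · simp only [if_neg gx, if_neg gy]
  rw [hstep1 res, hstep2]
  have hmapX : X.map Prod.fst = X.map Prod.fst := rfl
  rw [pvWriteC]

-- A's per-object relation
def pvObjRel (g : List (List Int)) (bg : Int) (h w : Nat)
    (s : Int × Int) (obj : List (Int × Int × Int)) : Prop :=
  ∃ O : List (Int × Int), obj = O.map (fun p => (p.1, p.2, pvCell g p.1 p.2)) ∧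
    O.Nodup ∧ ∀ q, q ∈ O ↔ pvReach g bg h w s q

-- applying A's objects (one per representative) equals the canonical fold over buckets
lemma pvApply_canon (g : List (List Int)) (bg : Int) (h w hh : Nat) :
    ∀ (reps : List (Int × Int)) (objs : List (List (Int × Int × Int))) (res : List (List Int)),
    List.Forall₂ (pvObjRel g bg h w) reps objs →
    (∀ s ∈ reps, pvGood g bg h w s ∧ pvRootD g bg h w (pvIdx w s) = pvIdx w s) →
    pvApplyA g hh res objs
      = reps.foldl (fun res s => pvWriteC g hh (pvBucket g bg h w (pvIdx w s)) res) res := by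
  intro reps objs res hF
  induction hF generalizing res with
  | nil => intro _; rfl
  | cons hrel hF' ih =>
    rename_i s obj reps' objs'
    intro hreps
    obtain ⟨hgs, hfix⟩ := hreps s (by simp)
    obtain ⟨O, rfl, hnd, hmem⟩ := hrel
    have hperm : O.Perm (pvBucket g bg h w (pvIdx w s)) := by
      apply (List.perm_ext_iff_of_nodup hnd (pvBucket_nodup g bg h w _)).mpr
      intro q
      rw [hmem q, mem_pvBucket hgs hfix]
    have hgood : ∀ q ∈ O, 0 ≤ q.1 ∧ 0 ≤ q.2 := by
      intro q hq
      rcases pvReach_good ((hmem q).mp hq) with rfl | hg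
      · exact ⟨hgs.1.1, hgs.1.2.2.1⟩
      · exact ⟨hg.1.1, hg.1.2.2.1⟩
    have hcons : pvApplyA g hh res (O.map (fun p => (p.1, p.2, pvCell g p.1 p.2)) :: objs')
        = pvApplyA g hh
          (pvApplyA g hh res [O.map (fun p => (p.1, p.2, pvCell g p.1 p.2))]) objs' := rfl
    rw [hcons, pvWriteOne g hh O (pvBucket g bg h w (pvIdx w s)) hperm hgood res]
    rw [List.foldl_cons]
    exact ih _ (fun x hx => hreps x (by simp [hx]))

-- ---------- the invariant of A's raster scan ----------

def pvAInv (g : List (List Int)) (bg : Int) (h w : Nat) (done : List (Int × Int))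
    (st : List (List Bool) × List (List (Int × Int × Int))) : Prop :=
  pvRect h w st.1 ∧
  (∀ q, pvVisP h w st.1 q ↔ (pvGood g bg h w q ∧
    ∃ s ∈ done.filter (pvRepP g bg h w), pvReach g bg h w s q)) ∧
  List.Forall₂ (pvObjRel g bg h w) (done.filter (pvRepP g bg h w)) st.2

lemma pvAInv_step {g : List (List Int)} {bg : Int} {h w : Nat}
    {done rest : List (Int × Int)} {p : Int × Int}
    {st : List (List Bool) × List (List (Int × Int × Int))}
    (hsplit : pvAllPos h w = done ++ p :: rest)
    (hinv : pvAInv g bg h w done st) :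
    pvAInv g bg h w (done ++ [p]) (pvStepA g bg h w st p) := by
  obtain ⟨hrect, hchar, hobjs⟩ := hinv
  have hnodup := pvAllPos_nodup h w
  have hpair := pvAllPos_pairwise h w
  rw [hsplit] at hnodup hpair
  have hpdone : p ∉ done := by
    intro hc
    exact (List.disjoint_of_nodup_append hnodup) hc (by simp)
  have hlt_done : ∀ q ∈ done, pvIdx w q < pvIdx w p :=
    fun q hq => (List.pairwise_append.mp hpair).2.2 q hq p (by simp)
  have hcover : ∀ q : Int × Int, pvInB h w q → pvIdx w q < pvIdx w p → q ∈ done := by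
    intro q hqin hqlt
    have hqmem : q ∈ done ++ p :: rest := by rw [← hsplit]; exact mem_pvAllPos.mpr hqin
    rcases List.mem_append.mp hqmem with hq | hq
    · exact hq
    · rcases List.mem_cons.mp hq with rfl | hq
      · omega
      · have h2 := (List.pairwise_cons.mp (List.pairwise_append.mp hpair).2.1).1 q hq
        omega
  have hpin : pvInB h w p := by
    have hm : p ∈ pvAllPos h w := by rw [hsplit]; simp
    exact mem_pvAllPos.mp hm
  have hgooddone : ∀ s ∈ done.filter (pvRepP g bg h w), pvGood g bg h w s ∧
      pvRootD g bg h w (pvIdx w s) = pvIdx w s := by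
    intro s hs
    obtain ⟨hsdone, hsP⟩ := List.mem_filter.mp hs
    rw [pvRepP, Bool.and_eq_true, decide_eq_true_eq, beq_iff_eq] at hsP
    have hsin : pvInB h w s := mem_pvAllPos.mp (by rw [hsplit]; simp [List.mem_append.mpr (Or.inl hsdone)])
    exact ⟨⟨hsin, hsP.1⟩, hsP.2⟩
  by_cases hact : pvVisRead st.1 p = false ∧ pvCell g p.1 p.2 ≠ bg
  · -- p is good and unvisited: it is a new representative
    have hgp : pvGood g bg h w p := ⟨hpin, hact.2⟩
    have hnv : ¬ pvVisP h w st.1 p := fun hv => by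
      rw [hv.2] at hact
      exact absurd hact.1 (by simp)
    obtain ⟨m, hgm, hrmp, hlem, hfixm, hrootp⟩ := pvRep_exists hgp
    have hmp : p = m := by
      by_contra hne
      have hlt : pvIdx w m < pvIdx w p := by
        have hne' : pvIdx w m ≠ pvIdx w p := fun he => hne (pvIdx_inj hgm.1 hgp.1 he).symm
        omega
      have hmdone : m ∈ done := hcover m hgm.1 hlt
      apply hnv
      apply (hchar p).mpr
      refine ⟨hgp, m, ?_, hrmp⟩
      rw [List.mem_filter]
      refine ⟨hmdone, ?_⟩
      rw [pvRepP, Bool.and_eq_true, decide_eq_true_eq, beq_iff_eq]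
      exact ⟨hgm.2, hfixm⟩
    subst hmp
    have hfixp : pvRootD g bg h w (pvIdx w p) = pvIdx w p := hfixm
    have hrepp : pvRepP g bg h w p = true := by
      rw [pvRepP, Bool.and_eq_true, decide_eq_true_eq, beq_iff_eq]
      exact ⟨hact.2, hfixp⟩
    have hV0cl : ∀ a, pvVisP h w st.1 a → ∀ q ∈ pvNbrs a, pvGood g bg h w q →
        pvVisP h w st.1 q := by
      intro a ha q hq hgq
      obtain ⟨hga, s, hs, hreach⟩ := (hchar a).mp ha
      exact (hchar q).mpr ⟨hgq, s, hs, hreach.tail ⟨hq, hgq⟩⟩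
    have hfuel : 2 * pvUnvis h w (pvVisP h w (pvVisMark st.1 p)) +
        ([p] : List (Int × Int)).length ≤ 2 * h * w + 1 := by
      have := pvUnvis_le h w (pvVisP h w (pvVisMark st.1 p))
      have hmul : 2 * h * w = 2 * (h * w) := Nat.mul_assoc 2 h w
      simp only [List.length_cons, List.length_nil]
      omega
    have hmark := pvVisP_mark hrect hpin
    have invf : PvFInv g bg h w (pvVisP h w st.1) p (pvVisP h w (pvVisMark st.1 p)) [p] [] := by
      refine ⟨?_, by simp, ?_, by simp, by simp⟩
      · intro q
        rw [hmark q]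
        simp only [List.mem_cons, List.not_mem_nil, or_false]
      · intro q hq
        simp only [List.append_nil, List.mem_cons, List.not_mem_nil, or_false] at hq
        subst hq
        exact ⟨hgp, Relation.ReflTransGen.refl, hnv⟩
    obtain ⟨O, vis', heqf, hrect', hndO, hmemO, hvch'⟩ :=
      pvFloodA_run g bg h w (pvVisP h w st.1) p hV0cl hgp hnv
        (2 * h * w + 1) (pvVisMark st.1 p) [p] [] [] (pvRect_mark hrect p) invf hfuel
    simp only [List.map_nil, List.nil_append] at heqf
    have hstep : pvStepA g bg h w st p =
        (vis', st.2 ++ [O.map (fun p => (p.1, p.2, pvCell g p.1 p.2))]) := by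
      unfold pvStepA
      rw [if_pos hact, heqf]
    rw [hstep]
    have hfp : List.filter (pvRepP g bg h w) [p] = [p] := by
      rw [List.filter_cons, if_pos hrepp]
      rfl
    refine ⟨hrect', ?_, ?_⟩
    · intro q
      show pvVisP h w vis' q ↔ _
      rw [hvch' q, List.filter_append, hfp]
      constructor
      · rintro (hv | hr)
        · obtain ⟨hgq, s, hs, hreach⟩ := (hchar q).mp hv
          exact ⟨hgq, s, List.mem_append.mpr (Or.inl hs), hreach⟩
        · have hgq : pvGood g bg h w q := by
            rcases pvReach_good hr with rfl | hg
            · exact hgp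
            · exact hg
          exact ⟨hgq, p, List.mem_append.mpr (Or.inr (by simp)), hr⟩
      · rintro ⟨hgq, s, hs, hreach⟩
        rcases List.mem_append.mp hs with hs | hs
        · exact Or.inl ((hchar q).mpr ⟨hgq, s, hs, hreach⟩)
        · simp only [List.mem_cons, List.not_mem_nil, or_false] at hs
          subst hs
          exact Or.inr hreach
    · rw [List.filter_append, hfp]
      exact List.rel_append hobjs
        (List.forall₂_cons.mpr ⟨⟨O, rfl, hndO, hmemO⟩, List.Forall₂.nil⟩)
  · -- skip: p is background or already visited; it is not a representative
    have hstep : pvStepA g bg h w st p = st := by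
      unfold pvStepA
      rw [if_neg hact]
    rw [hstep]
    have hrepp : pvRepP g bg h w p = false := by
      by_cases hbg : pvCell g p.1 p.2 = bg
      · rw [pvRepP]
        simp [hbg]
      · have hgp : pvGood g bg h w p := ⟨hpin, hbg⟩
        have hvp : pvVisP h w st.1 p := by
          by_cases hv : pvVisP h w st.1 p
          · exact hv
          · exfalso
            apply hact
            refine ⟨?_, hbg⟩
            by_cases hb : pvVisRead st.1 p = true
            · exact absurd ⟨hpin, hb⟩ hv
            · simpa using hb
        obtain ⟨hgq, s, hs, hreach⟩ := (hchar p).mp hvp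
        obtain ⟨hgs, hsfix⟩ := hgooddone s hs
        have hsdone := (List.mem_filter.mp hs).1
        have hslt : pvIdx w s < pvIdx w p := hlt_done s hsdone
        obtain ⟨m, hgm, hrm, hrootm, hmin⟩ := pvRoot_char hgp
        have hmle : pvIdx w m ≤ pvIdx w s := hmin s hgs (pvReach_symm hgs hreach)
        have hne : ¬ pvRootD g bg h w (pvIdx w p) = pvIdx w p := by
          rw [hrootm]
          omega
        rw [pvRepP]
        simp [hne]
    have hfp : List.filter (pvRepP g bg h w) [p] = [] := by
      rw [List.filter_cons, if_neg (by simp [hrepp])]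
      rfl
    have hfilt : (done ++ [p]).filter (pvRepP g bg h w) = done.filter (pvRepP g bg h w) := by
      rw [List.filter_append, hfp, List.append_nil]
    exact ⟨hrect, by rw [hfilt]; exact hchar, by rw [hfilt]; exact hobjs⟩

lemma pvAmain (g : List (List Int)) (bg : Int) (h w : Nat) :
    ∀ (l done : List (Int × Int)) (st : List (List Bool) × List (List (Int × Int × Int))),
    pvAllPos h w = done ++ l → pvAInv g bg h w done st →
    pvAInv g bg h w (done ++ l) (l.foldl (pvStepA g bg h w) st) := by
  intro l
  induction l with
  | nil => intro done st _ hinv; simpa using hinv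
  | cons p t ih =>
    intro done st hsplit hinv
    rw [List.foldl_cons]
    have hstep := pvAInv_step hsplit hinv
    have hsplit' : pvAllPos h w = (done ++ [p]) ++ t := by
      rw [hsplit, List.append_assoc]
      rfl
    have hres := ih (done ++ [p]) (pvStepA g bg h w st p) hsplit' hstep
    rw [List.append_assoc] at hres
    simpa using hres

lemma pvAInv_base (g : List (List Int)) (bg : Int) (h w : Nat) :
    pvAInv g bg h w []
      (List.replicate h (List.replicate w false), ([] : List (List (Int × Int × Int)))) := by
  refine ⟨pvRect_init h w, ?_, ?_⟩
  · intro q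
    constructor
    · intro hv
      exact absurd hv (pvVisP_init h w q)
    · rintro ⟨-, s, hs, -⟩
      simp at hs
  · exact List.Forall₂.nil

-- A's result, in canonical form
lemma pvA_canon (g : List (List Int)) :
    duplicate_objs_v g =
      (pvRepsL g (pvBgA g) g.length (g.headD []).length).foldl
        (fun res s => pvWriteC g g.length
          (pvBucket g (pvBgA g) g.length (g.headD []).length
            (pvIdx (g.headD []).length s)) res)
        (g.map (fun row => row)) := by
  rw [pvA_eq g, pvObjectsA_eq g (pvBgA g)]
  have hinv := pvAmain g (pvBgA g) g.length (g.headD []).length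
    (pvAllPos g.length (g.headD []).length) []
    (List.replicate g.length (List.replicate (g.headD []).length false), [])
    (by simp) (pvAInv_base g (pvBgA g) g.length (g.headD []).length)
  rw [List.nil_append] at hinv
  obtain ⟨-, -, hF⟩ := hinv
  exact pvApply_canon g (pvBgA g) g.length (g.headD []).length g.length _ _ _ hF
    (fun s hs => mem_pvRepsL.mp hs)

-- ---------- B's result, in canonical form ----------

def pvGbody (g : List (List Int)) (bg : Int) (h w : Nat) (P : PySem.Dict Int Int)
    (G : PySem.Dict Int (List (Int × Int))) (q : Int × Int) :
    PySem.Dict Int (List (Int × Int)) :=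
  if pvCell g q.1 q.2 ≠ bg then
    PySem.Dict.modify G (ufFind P (h * w + 1) (q.1 * (w : Int) + q.2)) [] (fun l => l ++ [q])
  else G

def pvGroupsD (g : List (List Int)) (bg : Int) (h w : Nat) :
    PySem.Dict Int (List (Int × Int)) :=
  (pvAllPos h w).foldl (pvGbody g bg h w (pvParentD g bg h w)) PySem.Dict.empty

def pvWriteAll (g : List (List Int)) (G : PySem.Dict Int (List (Int × Int))) :
    List (List Int) :=
  (PySem.List.sorted G.keys (fun x => x) false).foldl
    (fun res root => pvWriteC g g.length (G.getD root []) res) (g.map (fun row => row))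

lemma pvAlt_eq (g : List (List Int)) :
    duplicate_objs_v_alt g
      = pvWriteAll g (pvGroupsD g (pvBgA g) g.length (g.headD []).length) := by
  conv_rhs => rw [← pvBg_alt g]
  rw [pvWriteAll, pvGroupsD, pvParentD, ← pvFoldl_nested, ← pvFoldl_nested]
  rfl

-- the grouping fold, restricted to the good cells
lemma pvGroupsD_eq_filtered (g : List (List Int)) (bg : Int) (h w : Nat) :
    pvGroupsD g bg h w = (pvGoodCells g bg h w).foldl
      (fun G q => PySem.Dict.modify G (pvRootD g bg h w (pvIdx w q)) [] (fun l => l ++ [q]))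
      PySem.Dict.empty := by
  rw [pvGroupsD, pvGoodCells, List.foldl_filter]
  apply PySem.List.foldl_congr_mem
  intro acc q _
  rw [pvGbody]
  by_cases hc : pvCell g q.1 q.2 ≠ bg
  · rw [if_pos hc, if_pos (by simpa using hc)]
    rfl
  · rw [if_neg hc, if_neg (by simpa using hc)]

lemma pvGroupsD_keys (g : List (List Int)) (bg : Int) (h w : Nat) :
    (pvGroupsD g bg h w).keys
      = PySem.Set.ofList ((pvGoodCells g bg h w).map
          (fun q => pvRootD g bg h w (pvIdx w q))) := by
  rw [pvGroupsD_eq_filtered]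
  rw [PySem.Dict.keys_foldl_modify_key]
  rw [PySem.Dict.keys_empty, PySem.Set.update_nil_left]

lemma pvGroupsD_getD (g : List (List Int)) (bg : Int) (h w : Nat) (c : Int) :
    (pvGroupsD g bg h w).getD c [] = pvBucket g bg h w c := by
  rw [pvGroupsD_eq_filtered]
  have e2 : (pvGoodCells g bg h w).foldl
      (fun G q => PySem.Dict.modify G (pvRootD g bg h w (pvIdx w q)) [] (fun l => l ++ [q]))
      PySem.Dict.empty
      = ((pvGoodCells g bg h w).map
          (fun q => (pvRootD g bg h w (pvIdx w q), q))).foldl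
        (fun d p => PySem.Dict.modify d p.1 [] (fun l => l ++ [p.2])) PySem.Dict.empty := by
    rw [List.foldl_map]
  rw [e2, PySem.Dict.getD_foldl_modify_append, PySem.Dict.getD_empty, List.nil_append]
  rw [List.filter_map, List.map_map, pvBucket]
  have e3 : ((fun p : Int × (Int × Int) => p.2) ∘
      (fun q : Int × Int => (pvRootD g bg h w (pvIdx w q), q))) = fun q => q := by
    funext q
    rfl
  have e4 : ((fun p : Int × (Int × Int) => p.1 == c) ∘
      (fun q : Int × Int => (pvRootD g bg h w (pvIdx w q), q)))
      = fun q => pvRootD g bg h w (pvIdx w q) == c := by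
    funext q
    rfl
  rw [e3, e4, List.map_id']

lemma pvSortedKeys (g : List (List Int)) (bg : Int) (h w : Nat) :
    PySem.List.sorted (pvGroupsD g bg h w).keys (fun x => x) false
      = (pvRepsL g bg h w).map (pvIdx w) := by
  have hpw : ((pvRepsL g bg h w).map (pvIdx w)).Pairwise (fun a b => a < b) :=
    List.pairwise_map.mpr (pvRepsL_pairwise g bg h w)
  apply PySem.List.sorted_eq_of_perm_of_pairwise_lt
  · rw [pvGroupsD_keys]
    apply (List.perm_ext_iff_of_nodup (hpw.imp (fun hab => ne_of_lt hab))
      (PySem.Set.nodup_ofList _)).mpr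
    intro k
    rw [PySem.Set.mem_ofList, List.mem_map, List.mem_map]
    constructor
    · rintro ⟨s, hs, rfl⟩
      have hsr := mem_pvRepsL.mp hs
      refine ⟨s, mem_pvGoodCells.mpr hsr.1, ?_⟩
      exact hsr.2
    · rintro ⟨q, hq, rfl⟩
      have hgq := mem_pvGoodCells.mp hq
      obtain ⟨m, hgm, hrm, hlem, hfixm, hrootq⟩ := pvRep_exists hgq
      exact ⟨m, mem_pvRepsL.mpr ⟨hgm, hfixm⟩, hrootq.symm⟩
  · exact hpw

lemma pvAlt_canon (g : List (List Int)) :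
    duplicate_objs_v_alt g =
      (pvRepsL g (pvBgA g) g.length (g.headD []).length).foldl
        (fun res s => pvWriteC g g.length
          (pvBucket g (pvBgA g) g.length (g.headD []).length
            (pvIdx (g.headD []).length s)) res)
        (g.map (fun row => row)) := by
  rw [pvAlt_eq g, pvWriteAll, pvSortedKeys, List.foldl_map]
  apply PySem.List.foldl_congr_mem
  intro acc s _
  rw [pvGroupsD_getD]

-- ===== VERDICT (by name: the statement is the Claim_ definition above) =====
theorem duplicate_objs_v_spec : Claim_equal_duplicate_objs_v := by
  intro g _hdom _hpre
  show duplicate_objs_v g = duplicate_objs_v_alt g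
  rw [pvA_canon g, pvAlt_canon g]
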